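-- pv_equiv track=rewrite | github.com/HYEEWON/solve-algorithm-problems | programmers_2021_kakao_internship/210819_표편집_L3.py | solution
-- ===== SOURCE A (Python) =====
-- from collections import deque
--
-- def solution(n, k, cmd):
--     answer = ['O'] * n
--     table = {i: [i - 1, i + 1] for i in range(0, n)}
--     del_row = deque()
--
--     for c in cmd:
--         if c[0] == 'D':
--             for _ in range(int(c[2:])):
--                 k = table[k][1]
--         elif c[0] == 'U':
--             for _ in range(int(c[2:])):
--                 k = table[k][0]
--         elif c[0] == 'C':
--             prev, next = table[k]
--             del_row.append([prev, next, k])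
--             answer[k] = "X"
--
--             if next == n:
--                 k = table[k][0]
--             else:
--                 k = table[k][1]
--
--             if prev == -1:
--                 table[next][0] = prev
--             elif next == n:
--                 table[prev][1] = next
--             else:
--                 table[prev][1] = next
--                 table[next][0] = prev
--         elif c[0] == 'Z':
--             prev, next, now = del_row.pop()
--             answer[now] = "O"
--
--             if prev == -1:
--                 table[next][0] = now
--             elif next == n:
--                 table[prev][1] = now
--             else:
--                 table[prev][1] = now
--                 table[next][0] = now
--     return ''.join(answer)
-- ===== SOURCE B (Python) =====
-- # Order-statistics over the deleted set: O(1) cursor moves, O(|deleted|) per C/Z,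
-- # instead of A's linked-list walk that costs O(x) per move command.
-- def solution(n, k, cmd):
--     pos = k          # cursor as its rank among the still-present rows
--     dead = []        # stack of deleted row numbers (LIFO, like A's del_row)
--     for c in cmd:
--         op = c[0]
--         if op == 'D':
--             x = int(c[2:])
--             if x > 0:            # a non-positive count moves nothing
--                 pos += x
--         elif op == 'U':
--             x = int(c[2:])
--             if x > 0:
--                 pos -= x
--         elif op == 'C':
--             r = pos                      # row number of the pos-th present row:
--             for d in sorted(dead):       # shift past the deleted rows below it
--                 if d <= r:
--                     r += 1
--             dead.append(r)
--             if pos == n - len(dead):     # deleted the last present row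
--                 pos -= 1
--         elif op == 'Z':
--             r = dead.pop()
--             rank = r - sum(1 for d in dead if d < r)   # rank r re-enters at
--             if rank <= pos:
--                 pos += 1
--     res = ['O'] * n
--     for d in dead:
--         res[d] = 'X'
--     return ''.join(res)
-- ===== Notes on version B (the rewrite author's own statement) =====
-- stated objective: faster
-- what changed: B replaces A's doubly-linked-list walk (table dict, k stepped one row at a time) by order statistics over the deleted stack: the cursor is kept as a rank, so 'U X'/'D X' become O(1) integer additions, and C/Z locate the affected row by counting deleted rows below it.
import Mathlib
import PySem

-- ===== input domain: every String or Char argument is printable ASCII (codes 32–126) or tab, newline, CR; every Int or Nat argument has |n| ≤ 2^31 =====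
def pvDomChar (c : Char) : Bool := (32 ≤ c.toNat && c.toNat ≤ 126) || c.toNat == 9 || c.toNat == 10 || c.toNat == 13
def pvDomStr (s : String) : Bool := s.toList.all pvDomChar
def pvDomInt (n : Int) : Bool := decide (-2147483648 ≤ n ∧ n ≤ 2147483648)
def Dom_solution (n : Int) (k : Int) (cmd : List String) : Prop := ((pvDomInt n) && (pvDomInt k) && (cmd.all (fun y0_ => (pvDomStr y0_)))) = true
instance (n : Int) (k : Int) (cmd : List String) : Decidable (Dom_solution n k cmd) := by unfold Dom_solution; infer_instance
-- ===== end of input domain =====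

-- B re-implements the table editor with order statistics over the DELETED set (O(1) cursor moves)
-- instead of A's doubly-linked-list walk; equivalence is proved on every input where A returns.

-- ===== PORT A =====
-- A's per-command loop body; the dict {i: [prev, next]} is a PySem.Dict Int (Int × Int),
-- the deque del_row (appended/popped on the right) is a List of (prev, next, row) triples.
def pvStepA (n : Int)
    (st : List String × PySem.Dict Int (Int × Int) × List (Int × Int × Int) × Int)
    (c : String) :
    List String × PySem.Dict Int (Int × Int) × List (Int × Int × Int) × Int :=
  let answer := st.1
  let table := st.2.1
  let delRow := st.2.2.1
  let k := st.2.2.2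
  let c0 := (PySem.Str.pyGet? c 0).getD ' '      -- c[0]; none (IndexError) is outside Pre_
  if c0 = 'D' then
    -- for _ in range(int(c[2:])): k = table[k][1]   (KeyError/ValueError outside Pre_)
    let x := (PySem.Int.ofStr? (PySem.Str.slice c (some 2) none)).getD 0
    (answer, table, delRow, (fun j => (table.getD j (0, 0)).2)^[x.toNat] k)
  else if c0 = 'U' then
    let x := (PySem.Int.ofStr? (PySem.Str.slice c (some 2) none)).getD 0
    (answer, table, delRow, (fun j => (table.getD j (0, 0)).1)^[x.toNat] k)
  else if c0 = 'C' then
    let pn := table.getD k (0, 0)                -- prev, next = table[k]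
    let delRow' := delRow ++ [(pn.1, pn.2, k)]
    let answer' := answer.set k.toNat "X"        -- answer[k] = "X"; Pre_ gives 0 ≤ k < n
    let k' := if pn.2 = n then (table.getD k (0, 0)).1 else (table.getD k (0, 0)).2
    let table' :=
      if pn.1 = -1 then table.modify pn.2 (0, 0) (fun v => (pn.1, v.2))
      else if pn.2 = n then table.modify pn.1 (0, 0) (fun v => (v.1, pn.2))
      else (table.modify pn.1 (0, 0) (fun v => (v.1, pn.2))).modify pn.2 (0, 0) (fun v => (pn.1, v.2))
    (answer', table', delRow', k')
  else if c0 = 'Z' then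
    match delRow.getLast? with
    | none => (answer, table, delRow, k)         -- del_row.pop() raises IndexError: outside Pre_
    | some pnn =>
      let delRow' := delRow.dropLast
      let answer' := answer.set pnn.2.2.toNat "O"
      let table' :=
        if pnn.1 = -1 then table.modify pnn.2.1 (0, 0) (fun v => (pnn.2.2, v.2))
        else if pnn.2.1 = n then table.modify pnn.1 (0, 0) (fun v => (v.1, pnn.2.2))
        else (table.modify pnn.1 (0, 0) (fun v => (v.1, pnn.2.2))).modify pnn.2.1 (0, 0)
              (fun v => (pnn.2.2, v.2))
      (answer', table', delRow', k)
  else (answer, table, delRow, k)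

def solution (n : Int) (k : Int) (cmd : List String) : String :=
  let answer := PySem.List.pyRepeat ["O"] n      -- ['O'] * n
  let table := (PySem.List.pyRange 0 n 1).foldl (fun t i => t.insert i (i - 1, i + 1))
      PySem.Dict.empty                           -- {i: [i-1, i+1] for i in range(0, n)}
  (PySem.Str.join "" (cmd.foldl (pvStepA n) (answer, table, [], k)).1)

-- ===== PORT B =====
-- row number of the pos-th still-present row: shift pos past the deleted rows below it
-- (Source B's 'r = pos; for d in sorted(dead): if d <= r: r += 1').
def pvSelect (dead : List Int) (pos : Int) : Int :=
  (PySem.List.sorted dead (fun d => d)).foldl (fun r d => if d ≤ r then r + 1 else r) pos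

def pvStepB (n : Int) (st : Int × List Int) (c : String) : Int × List Int :=
  let pos := st.1
  let dead := st.2
  let c0 := (PySem.Str.pyGet? c 0).getD ' '
  if c0 = 'D' then
    let x := (PySem.Int.ofStr? (PySem.Str.slice c (some 2) none)).getD 0
    if 0 < x then (pos + x, dead) else (pos, dead)
  else if c0 = 'U' then
    let x := (PySem.Int.ofStr? (PySem.Str.slice c (some 2) none)).getD 0
    if 0 < x then (pos - x, dead) else (pos, dead)
  else if c0 = 'C' then
    let dead' := dead ++ [pvSelect dead pos]
    (if pos = n - dead'.length then pos - 1 else pos, dead')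
  else if c0 = 'Z' then
    match dead.getLast? with
    | none => st
    | some r =>
      let dead' := dead.dropLast
      let rank := r - (dead'.countP (fun d => decide (d < r)) : Int)
      (if rank ≤ pos then pos + 1 else pos, dead')
  else st

def solution_alt (n : Int) (k : Int) (cmd : List String) : String :=
  let dead := (cmd.foldl (pvStepB n) (k, [])).2
  let res := dead.foldl (fun res d => PySem.List.pySetD res d "X") (PySem.List.pyRepeat ["O"] n)
  PySem.Str.join "" res

-- ===== PRECONDITION & SPEC =====
-- Validity checker for one command: `none` = A raises from this state on.
-- Whether a command raises depends on the running cursor rank and deleted stack, so the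
-- checker necessarily tracks them; it consults neither port's result (a bounds/shape checker).
def pvOk (n : Int) (c : String) (st : Int × List Int) : Option (Int × List Int) :=
  let pos := st.1
  let dead := st.2
  match PySem.Str.pyGet? c 0 with
  | none => none                                 -- empty command: c[0] raises IndexError
  | some c0 =>
    if c0 = 'D' then
      match PySem.Int.ofStr? (PySem.Str.slice c (some 2) none) with
      | none => none                             -- int(c[2:]) raises ValueError
      | some x =>
        if x ≤ 0 then some st                    -- range() over a non-positive count: no-op
        -- x dereferences of table[k]: the walk may stop one past the last live row (a
        -- sentinel A never reads again here) but each read needs a live row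
        else if 0 ≤ pos ∧ pos + x ≤ n - dead.length then some (pos + x, dead) else none
    else if c0 = 'U' then
      match PySem.Int.ofStr? (PySem.Str.slice c (some 2) none) with
      | none => none
      | some x =>
        if x ≤ 0 then some st
        else if 0 ≤ pos ∧ pos < n - dead.length ∧ -1 ≤ pos - x then some (pos - x, dead)
        else none
    else if c0 = 'C' then
      -- the cursor must be live, and deleting the only remaining row raises (table[n])
      if 0 ≤ pos ∧ pos < n - dead.length ∧ 2 ≤ n - dead.length then
        let dead' := dead ++ [pvSelect dead pos]
        some (if pos = n - dead'.length then pos - 1 else pos, dead')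
      else none
    else if c0 = 'Z' then
      match dead.getLast? with
      | none => none                             -- del_row.pop() on an empty deque raises
      | some r =>
        let dead' := dead.dropLast
        let rank := r - (dead'.countP (fun d => decide (d < r)) : Int)
        some (if rank ≤ pos then pos + 1 else pos, dead')
    else some st                                 -- any other command is ignored by A

-- Pre_solution: exactly the inputs on which A returns (no exception). It excludes only the
-- scripts on which A raises: an empty command string (c[0]), a malformed count (int(c[2:])),
-- a walk or a C that dereferences table[-1]/table[n] (cursor off the live rows), deleting
-- the only remaining row (table[n] in the relink), or Z with nothing to undo (pop()).
def Pre_solution (n : Int) (k : Int) (cmd : List String) : Prop :=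
  (cmd.foldl (fun st c => st.bind (pvOk n c)) (some (k, []))).isSome = true

instance (n : Int) (k : Int) (cmd : List String) : Decidable (Pre_solution n k cmd) := by
  unfold Pre_solution; infer_instance

def pvWitness_solution : Int × Int × List String := (3, 0, ["D 2", "C", "U 1", "Z", "C"])

def Spec_solution (n : Int) (k : Int) (cmd : List String) (out : String) : Prop := out = solution_alt n k cmd
instance (n : Int) (k : Int) (cmd : List String) (out : String) : Decidable (Spec_solution n k cmd out) := by unfold Spec_solution; infer_instance

-- ===== CLAIM (what is proved, stated in full; the proofs are below) =====
def Claim_equal_solution : Prop := ∀ (n : Int) (k : Int) (cmd : List String), Dom_solution n k cmd → Pre_solution n k cmd → Spec_solution n k cmd (solution n k cmd)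

-- ===== LEMMAS AND PROOFS =====

-- ---------- the live-row list and its neighbour functions ----------

/-- The still-present rows, in increasing order: range(n) minus the deleted stack `dd`. -/
def alvL (n : Int) (dd : List Int) : List Int :=
  (PySem.List.pyRange 0 n 1).filter (fun i => decide (i ∉ dd))

/-- Largest element of `S` below `r` (`-1` if none): A's `table[r][0]` for a live row. -/
def predOf (S : List Int) (r : Int) : Int :=
  ((S.filter (fun a => decide (a < r))).getLast?).getD (-1)

/-- Smallest element of `S` above `r` (`n` if none): A's `table[r][1]` for a live row. -/
def succOf (n : Int) (S : List Int) (r : Int) : Int :=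
  ((S.filter (fun a => decide (r < a))).head?).getD n

lemma mem_alvL {n : Int} {dd : List Int} {i : Int} :
    i ∈ alvL n dd ↔ (0 ≤ i ∧ i < n) ∧ i ∉ dd := by
  simp [alvL, List.mem_filter, PySem.List.mem_pyRange_one]

lemma sorted_alvL (n : Int) (dd : List Int) : (alvL n dd).Pairwise (· < ·) :=
  List.Pairwise.sublist List.filter_sublist (PySem.List.pairwise_lt_pyRange_one 0 n)

/-- In a strictly increasing list, the elements below `S[q]` are exactly the first `q`. -/
lemma filter_lt_eq_take {S : List Int} (hS : S.Pairwise (· < ·)) {q : Nat} (hq : q < S.length) :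
    S.filter (fun a => decide (a < S[q])) = S.take q := by
  induction S generalizing q with
  | nil => simp at hq
  | cons a T ih =>
    obtain ⟨ha, hT⟩ := List.pairwise_cons.mp hS
    cases q with
    | zero =>
      simp only [List.getElem_cons_zero, List.take_zero]
      rw [List.filter_cons]
      simp only [lt_irrefl, decide_false, Bool.false_eq_true, if_false]
      rw [List.filter_eq_nil_iff]
      intro b hb
      simp only [decide_eq_true_eq, not_lt]
      exact le_of_lt (ha b hb)
    | succ q =>
      have hq' : q < T.length := by simpa using Nat.lt_of_succ_lt_succ hq
      simp only [List.getElem_cons_succ, List.take_succ_cons]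
      rw [List.filter_cons]
      have haq : a < T[q] := ha _ (List.getElem_mem _)
      simp only [haq, decide_true, if_true]
      exact congrArg (a :: ·) (ih hT hq')

/-- In a strictly increasing list, the elements above `S[q]` are exactly those after index `q`. -/
lemma filter_gt_eq_drop {S : List Int} (hS : S.Pairwise (· < ·)) {q : Nat} (hq : q < S.length) :
    S.filter (fun a => decide (S[q] < a)) = S.drop (q + 1) := by
  induction S generalizing q with
  | nil => simp at hq
  | cons a T ih =>
    obtain ⟨ha, hT⟩ := List.pairwise_cons.mp hS
    cases q with
    | zero =>
      simp only [List.getElem_cons_zero, List.drop_succ_cons, List.drop_zero]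
      rw [List.filter_cons]
      simp only [lt_irrefl, decide_false, Bool.false_eq_true, if_false]
      rw [List.filter_eq_self]
      intro b hb
      simpa using ha b hb
    | succ q =>
      have hq' : q < T.length := by simpa using Nat.lt_of_succ_lt_succ hq
      simp only [List.getElem_cons_succ, List.drop_succ_cons]
      rw [List.filter_cons]
      have haq : ¬ (T[q] < a) := not_lt.mpr (le_of_lt (ha _ (List.getElem_mem _)))
      simp only [haq, decide_false, Bool.false_eq_true, if_false]
      exact ih hT hq'

lemma predOf_getElem {S : List Int} (hS : S.Pairwise (· < ·)) {q : Nat} (hq : q < S.length) :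
    predOf S S[q] = if h : q = 0 then -1 else S[q - 1]'(by omega) := by
  unfold predOf
  rw [filter_lt_eq_take hS hq]
  split
  · subst ‹q = 0›; simp
  · rename_i h
    rw [List.getLast?_eq_getElem?]
    have hlen : (S.take q).length = q := by simp; omega
    rw [hlen, List.getElem?_take_of_lt (by omega), List.getElem?_eq_getElem (by omega)]
    rfl

lemma succOf_getElem {n : Int} {S : List Int} (hS : S.Pairwise (· < ·)) {q : Nat}
    (hq : q < S.length) :
    succOf n S S[q] = if h : q + 1 < S.length then S[q + 1] else n := by
  unfold succOf
  rw [filter_gt_eq_drop hS hq]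
  split
  · rename_i h
    rw [List.head?_drop, List.getElem?_eq_getElem h]
    rfl
  · rename_i h
    rw [List.head?_drop, List.getElem?_eq_none (by omega)]
    rfl

-- ---------- size of the live list ----------

lemma length_alvL {n : Int} {dd : List Int} (hnd : dd.Nodup)
    (hm : ∀ d ∈ dd, 0 ≤ d ∧ d < n) :
    (alvL n dd).length = n.toNat - dd.length ∧ dd.length ≤ n.toNat := by
  classical
  have hsplit := List.length_eq_length_filter_add (l := PySem.List.pyRange 0 n 1)
    (fun i => decide (i ∉ dd))
  have hperm : List.Perm ((PySem.List.pyRange 0 n 1).filter (fun i => !decide (i ∉ dd))) dd := by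
    apply (List.perm_ext_iff_of_nodup (List.Nodup.filter _ (PySem.List.nodup_pyRange_one 0 n)) hnd).mpr
    intro x
    simp only [List.mem_filter, PySem.List.mem_pyRange_one, Bool.not_eq_eq_eq_not,
      Bool.not_true, decide_eq_false_iff_not, not_not]
    constructor
    · rintro ⟨_, hx⟩; exact hx
    · intro hx; exact ⟨⟨(hm x hx).1, (hm x hx).2⟩, hx⟩
  have hlen2 : ((PySem.List.pyRange 0 n 1).filter (fun i => !decide (i ∉ dd))).length = dd.length :=
    hperm.length_eq
  have hrl : (PySem.List.pyRange 0 n 1).length = (n - 0).toNat := PySem.List.length_pyRange_one 0 n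
  simp only [sub_zero] at hrl
  constructor
  · show ((PySem.List.pyRange 0 n 1).filter (fun i => decide (i ∉ dd))).length = _
    omega
  · omega

-- ---------- the initial table {i: [i-1, i+1]} ----------

lemma getD_table0_aux (a b : Int) (t0 : PySem.Dict Int (Int × Int)) (j : Int) (d : Int × Int) :
    ((PySem.List.pyRange a b 1).foldl (fun t i => t.insert i (i - 1, i + 1)) t0).getD j d =
      if a ≤ j ∧ j < b then (j - 1, j + 1) else t0.getD j d := by
  by_cases hab : a ≤ b
  · induction hn : (b - a).toNat generalizing b with
    | zero =>
      have : b ≤ a := by omega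
      rw [PySem.List.pyRange_one_eq_nil this]
      simp only [List.foldl_nil]
      have : ¬ (a ≤ j ∧ j < b) := by omega
      rw [if_neg this]
    | succ m ih =>
      have hb : a ≤ b - 1 := by omega
      have hsr := PySem.List.pyRange_one_succ_right (a := a) (b := b - 1) hb
      rw [show b - 1 + 1 = b by ring] at hsr
      rw [hsr, List.foldl_append]
      simp only [List.foldl_cons, List.foldl_nil]
      rw [PySem.Dict.getD_insert]
      by_cases hj : j = b - 1
      · subst hj
        rw [if_pos rfl, if_pos (by omega)]
      · rw [if_neg hj, ih (b-1) hb (by omega)]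
        by_cases h1 : a ≤ j ∧ j < b - 1
        · rw [if_pos h1, if_pos (by omega)]
        · rw [if_neg h1, if_neg (by omega)]
  · rw [PySem.List.pyRange_one_eq_nil (by omega)]
    simp only [List.foldl_nil]
    rw [if_neg (by omega)]

-- ---------- the joint invariant between A's state and B's state ----------

/-- `PvInv n pos dd A`: A's state `A = (answer, table, del_row, k)` is the linked-list picture of
    B's state `(pos, dd)` (cursor rank `pos`, deleted stack `dd`); the cursor is either still the
    untouched initial one, or a live row, or one of the two sentinels `-1`/`n` the walk may park on. -/
structure PvInv (n : Int) (pos : Int) (dd : List Int)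
    (A : List String × PySem.Dict Int (Int × Int) × List (Int × Int × Int) × Int) : Prop where
  nodup : dd.Nodup
  mem : ∀ d ∈ dd, 0 ≤ d ∧ d < n
  ans : A.1 = (PySem.List.pyRange 0 n 1).map (fun i => if i ∈ dd then "X" else "O")
  cur : (dd = [] ∧ A.2.2.2 = pos) ∨
        (0 ≤ pos ∧ pos < n - dd.length ∧ A.2.2.2 = (alvL n dd).getD pos.toNat 0) ∨
        (pos = -1 ∧ A.2.2.2 = -1) ∨
        (pos = n - dd.length ∧ A.2.2.2 = n)
  tbl : ∀ r ∈ alvL n dd, A.2.1.getD r (0, 0) = (predOf (alvL n dd) r, succOf n (alvL n dd) r)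
  stkLen : A.2.2.1.length = dd.length
  stk : ∀ i, i < dd.length →
    A.2.2.1.getD i (0, 0, 0) =
      (predOf (alvL n (dd.take (i + 1))) (dd.getD i 0),
       succOf n (alvL n (dd.take (i + 1))) (dd.getD i 0), dd.getD i 0)
  tblDead : ∀ i, i < dd.length →
    A.2.1.getD (dd.getD i 0) (0, 0) =
      (predOf (alvL n (dd.take (i + 1))) (dd.getD i 0),
       succOf n (alvL n (dd.take (i + 1))) (dd.getD i 0))

lemma pvInv_init (n k : Int) :
    PvInv n k []
      (PySem.List.pyRepeat ["O"] n,
       (PySem.List.pyRange 0 n 1).foldl (fun t i => t.insert i (i - 1, i + 1)) PySem.Dict.empty,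
       [], k) := by
  constructor
  · exact List.nodup_nil
  · intro d hd; simp at hd
  · show PySem.List.pyRepeat ["O"] n = _
    rw [PySem.List.pyRepeat_singleton]
    have : ∀ i : Int, (if i ∈ ([] : List Int) then "X" else "O") = "O" := by simp
    rw [List.map_congr_left (fun i _ => this i), List.map_const']
    rw [PySem.List.length_pyRange_one]
    congr 1
    omega
  · exact Or.inl ⟨rfl, rfl⟩
  · intro r hr
    have hr' := mem_alvL.mp hr
    show ((PySem.List.pyRange 0 n 1).foldl _ PySem.Dict.empty).getD r (0,0) = _
    rw [getD_table0_aux, if_pos ⟨hr'.1.1, hr'.1.2⟩]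
    have hA : alvL n [] = PySem.List.pyRange 0 n 1 := by
      unfold alvL; rw [List.filter_eq_self.mpr]; intro b _; simp
    have hsplit : PySem.List.pyRange 0 n 1 = PySem.List.pyRange 0 r 1 ++ PySem.List.pyRange r n 1 :=
      PySem.List.pyRange_one_append 0 r n (by omega) (by omega)
    have hpred : predOf (alvL n []) r = r - 1 := by
      unfold predOf
      rw [hA, hsplit, List.filter_append]
      rw [List.filter_eq_self.mpr (by
        intro b hb; rw [PySem.List.mem_pyRange_one] at hb; simp [hb.2])]
      rw [List.filter_eq_nil_iff.mpr (by
        intro b hb; rw [PySem.List.mem_pyRange_one] at hb; simp; omega)]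
      rw [List.append_nil]
      by_cases h0 : r = 0
      · subst h0
        rw [PySem.List.pyRange_one_eq_nil (by omega)]
        rfl
      · rw [List.getLast?_eq_getElem?, PySem.List.length_pyRange_one]
        rw [List.getElem?_eq_getElem (by rw [PySem.List.length_pyRange_one]; omega)]
        rw [PySem.List.getElem_pyRange_one]
        simp only [Option.getD_some]
        omega
    have hsucc : succOf n (alvL n []) r = r + 1 := by
      unfold succOf
      rw [hA, hsplit, List.filter_append]
      rw [List.filter_eq_nil_iff.mpr (by
        intro b hb; rw [PySem.List.mem_pyRange_one] at hb; simp; omega)]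
      rw [PySem.List.pyRange_one_cons (show r < n by omega)]
      rw [List.filter_cons]
      simp only [lt_irrefl, decide_false, Bool.false_eq_true, if_false]
      rw [List.filter_eq_self.mpr (by
        intro b hb; rw [PySem.List.mem_pyRange_one] at hb; simp; omega)]
      rw [List.nil_append]
      by_cases h1 : r + 1 < n
      · rw [PySem.List.pyRange_one_cons (by omega)]
        rfl
      · rw [PySem.List.pyRange_one_eq_nil (by omega)]
        show n = r + 1
        omega
    rw [hpred, hsucc]
  · rfl
  · intro i hi; simp at hi
  · intro i hi; simp at hi

-- ---------- cursor bounds and the linked-list walk ----------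

lemma length_alvL_int {n : Int} {dd : List Int} (hnd : dd.Nodup)
    (hm : ∀ d ∈ dd, 0 ≤ d ∧ d < n) (hpos : 0 < n - (dd.length : Int)) :
    ((alvL n dd).length : Int) = n - dd.length := by
  obtain ⟨h1, h2⟩ := length_alvL hnd hm
  omega

lemma walk_next {n : Int} {S : List Int} {table : PySem.Dict Int (Int × Int)}
    (hS : S.Pairwise (· < ·))
    (htbl : ∀ r ∈ S, table.getD r (0, 0) = (predOf S r, succOf n S r)) :
    ∀ (x q : Nat) (h : q + x < S.length),
      (fun j => (table.getD j (0, 0)).2)^[x] (S[q]'(by omega)) = S[q + x] := by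
  intro x
  induction x with
  | zero => intro q h; simp
  | succ x ih =>
    intro q h
    rw [Function.iterate_succ_apply]
    have hq : q < S.length := by omega
    have hstep : (table.getD (S[q]'hq) (0, 0)).2 = S[q + 1]'(by omega) := by
      rw [htbl _ (List.getElem_mem _), succOf_getElem hS hq]
      rw [dif_pos (by omega)]
    rw [hstep, ih (q + 1) (by omega)]
    congr 1
    omega

lemma walk_prev {n : Int} {S : List Int} {table : PySem.Dict Int (Int × Int)}
    (hS : S.Pairwise (· < ·))
    (htbl : ∀ r ∈ S, table.getD r (0, 0) = (predOf S r, succOf n S r)) :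
    ∀ (x q : Nat) (hx : x ≤ q) (h : q < S.length),
      (fun j => (table.getD j (0, 0)).1)^[x] (S[q]'h) = S[q - x]'(by omega) := by
  intro x
  induction x with
  | zero => intro q hx h; simp
  | succ x ih =>
    intro q hx h
    rw [Function.iterate_succ_apply]
    have hstep : (table.getD (S[q]'h) (0, 0)).1 = S[q - 1]'(by omega) := by
      rw [htbl _ (List.getElem_mem _), predOf_getElem hS h]
      rw [dif_neg (by omega)]
    rw [hstep, ih (q - 1) (by omega) (by omega)]
    congr 1
    omega

/-- A walk of exactly `x = S.length - q` forward steps parks the cursor on the sentinel `n`. -/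
lemma walk_next_sentinel {n : Int} {S : List Int} {table : PySem.Dict Int (Int × Int)}
    (hS : S.Pairwise (· < ·))
    (htbl : ∀ r ∈ S, table.getD r (0, 0) = (predOf S r, succOf n S r))
    (x q : Nat) (hqx : q + x = S.length) (hx : 1 ≤ x) (hq : q < S.length) :
    (fun j => (table.getD j (0, 0)).2)^[x] (S[q]'hq) = n := by
  obtain ⟨m, rfl⟩ : ∃ m, x = m + 1 := ⟨x - 1, by omega⟩
  rw [Function.iterate_succ_apply']
  rw [walk_next hS htbl m q (by omega)]
  rw [htbl _ (List.getElem_mem _), succOf_getElem hS (show q + m < S.length by omega)]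
  rw [dif_neg (by omega)]

/-- A walk of exactly `q + 1` backward steps parks the cursor on the sentinel `-1`. -/
lemma walk_prev_sentinel {n : Int} {S : List Int} {table : PySem.Dict Int (Int × Int)}
    (hS : S.Pairwise (· < ·))
    (htbl : ∀ r ∈ S, table.getD r (0, 0) = (predOf S r, succOf n S r))
    (x q : Nat) (hxq : x = q + 1) (hq : q < S.length) :
    (fun j => (table.getD j (0, 0)).1)^[x] (S[q]'hq) = -1 := by
  subst hxq
  rw [Function.iterate_succ_apply']
  rw [walk_prev hS htbl q q le_rfl hq]
  rw [htbl _ (List.getElem_mem _), predOf_getElem hS (show q - q < S.length by omega)]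
  rw [dif_pos (by omega)]

-- ---------- pvSelect finds the pos-th live row ----------

lemma pvSelect_aux {n : Int} :
    ∀ (ds : List Int), ds.Pairwise (· < ·) → (∀ d ∈ ds, 0 ≤ d ∧ d < n) →
      ∀ (p : Int), 0 ≤ p → p.toNat < (alvL n ds).length →
        ds.foldl (fun r d => if d ≤ r then r + 1 else r) p = (alvL n ds).getD p.toNat 0 := by
  intro ds
  induction ds generalizing n with
  | nil =>
    intro _ _ p h0 hlt
    simp only [List.foldl_nil]
    have hA : alvL n [] = PySem.List.pyRange 0 n 1 := by
      unfold alvL; rw [List.filter_eq_self.mpr]; intro b _; simp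
    rw [List.getD_eq_getElem _ _ hlt]
    rw [List.getElem_of_eq hA, PySem.List.getElem_pyRange_one]
    omega
  | cons d rest ih =>
    intro hs hm p h0 hlt
    obtain ⟨hd, hrest⟩ := List.pairwise_cons.mp hs
    have hdm := hm d (by simp)
    have hT : ∀ i ∈ PySem.List.pyRange (d + 1) n 1, d < i := by
      intro i hi; rw [PySem.List.mem_pyRange_one] at hi; omega
    have hsplit : PySem.List.pyRange 0 n 1 =
        PySem.List.pyRange 0 (d + 1) 1 ++ PySem.List.pyRange (d + 1) n 1 :=
      PySem.List.pyRange_one_append 0 (d + 1) n (by omega) (by omega)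
    have hcur : alvL n (d :: rest) =
        PySem.List.pyRange 0 d 1 ++ (PySem.List.pyRange (d + 1) n 1).filter
          (fun i => decide (i ∉ rest)) := by
      unfold alvL
      rw [hsplit, List.filter_append]
      congr 1
      · have h1 : PySem.List.pyRange 0 (d + 1) 1 = PySem.List.pyRange 0 d 1 ++ [d] := by
          have := PySem.List.pyRange_one_succ_right (a := 0) (b := d) (by omega)
          exact this
        rw [h1, List.filter_append]
        rw [List.filter_eq_self.mpr (by
          intro b hb; rw [PySem.List.mem_pyRange_one] at hb
          simp only [List.mem_cons, decide_eq_true_eq, not_or]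
          exact ⟨by omega, fun hbr => absurd (hd b hbr) (by omega)⟩)]
        rw [show List.filter (fun i => decide (i ∉ d :: rest)) [d] = [] by simp]
        rw [List.append_nil]
      · apply List.filter_congr
        intro i hi
        have := hT i hi
        simp only [List.mem_cons, decide_eq_true_eq, not_or]
        by_cases hir : i ∈ rest
        · simp [hir]
        · simp [hir]; omega
    have hrst : alvL n rest =
        PySem.List.pyRange 0 (d + 1) 1 ++ (PySem.List.pyRange (d + 1) n 1).filter
          (fun i => decide (i ∉ rest)) := by
      unfold alvL
      rw [hsplit, List.filter_append]
      congr 1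
      rw [List.filter_eq_self.mpr]
      intro b hb
      rw [PySem.List.mem_pyRange_one] at hb
      refine decide_eq_true ?_
      intro hbr
      exact absurd (hd b hbr) (by omega)
    have hlen0 : (PySem.List.pyRange 0 d 1).length = d.toNat := by
      rw [PySem.List.length_pyRange_one]; congr 1; omega
    have hlen1 : (PySem.List.pyRange 0 (d + 1) 1).length = d.toNat + 1 := by
      rw [PySem.List.length_pyRange_one]; omega
    have hlencur : (alvL n (d :: rest)).length + 1 = (alvL n rest).length := by
      rw [hcur, hrst, List.length_append, List.length_append, hlen0, hlen1]
      omega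
    rw [List.foldl_cons]
    by_cases hdp : d ≤ p
    · rw [if_pos hdp]
      rw [ih hrest (fun x hx => hm x (by simp [hx])) (p + 1) (by omega) (by omega)]
      rw [List.getD_eq_getElem _ _ hlt, List.getD_eq_getElem _ _ (by omega)]
      rw [List.getElem_of_eq hcur, List.getElem_of_eq hrst]
      rw [List.getElem_append_right (by simp [PySem.List.length_pyRange_one]; omega),
          List.getElem_append_right (by simp [PySem.List.length_pyRange_one]; omega)]
      congr 1
      rw [hlen0, hlen1]
      omega
    · rw [if_neg hdp]
      rw [ih hrest (fun x hx => hm x (by simp [hx])) p (by omega) (by omega)]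
      rw [List.getD_eq_getElem _ _ hlt, List.getD_eq_getElem _ _ (by omega)]
      rw [List.getElem_of_eq hcur, List.getElem_of_eq hrst]
      rw [List.getElem_append_left (by simp [PySem.List.length_pyRange_one]; omega),
          List.getElem_append_left (by simp [PySem.List.length_pyRange_one]; omega)]
      rw [PySem.List.getElem_pyRange_one, PySem.List.getElem_pyRange_one]

lemma alvL_congr_perm {n : Int} {dd ds : List Int} (h : List.Perm dd ds) :
    alvL n dd = alvL n ds := by
  unfold alvL
  apply List.filter_congr
  intro i _
  by_cases hi : i ∈ dd
  · simp [hi, h.mem_iff.mp hi]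
  · have hi' : i ∉ ds := fun c => hi (h.mem_iff.mpr c)
    simp [hi, hi']

lemma pvSelect_eq {n : Int} {dd : List Int} (hnd : dd.Nodup)
    (hm : ∀ d ∈ dd, 0 ≤ d ∧ d < n) {p : Int} (h0 : 0 ≤ p) (hlt : p.toNat < (alvL n dd).length) :
    pvSelect dd p = (alvL n dd).getD p.toNat 0 := by
  unfold pvSelect
  have hperm : List.Perm (PySem.List.sorted dd (fun d => d) false) dd :=
    PySem.List.sorted_perm dd (fun d => d) false
  have hnd' : (PySem.List.sorted dd (fun d => d) false).Nodup := hperm.nodup_iff.mpr hnd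
  have hle : (PySem.List.sorted dd (fun d => d) false).Pairwise (· ≤ ·) :=
    PySem.List.sorted_pairwise dd (fun d => d)
  have hlt' : (PySem.List.sorted dd (fun d => d) false).Pairwise (· < ·) := by
    have := List.Pairwise.and hle hnd'
    exact this.imp (fun h => lt_of_le_of_ne h.1 h.2)
  have heq : alvL n dd = alvL n (PySem.List.sorted dd (fun d => d) false) :=
    alvL_congr_perm hperm.symm
  rw [heq] at hlt ⊢
  exact pvSelect_aux _ hlt' (fun x hx => hm x (hperm.mem_iff.mp hx)) p h0 hlt

-- ---------- the neighbour-relinking update both branches of A use ----------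

/-- A's three-branch neighbour update: `table[next][0] = a` / `table[prev][1] = b`
    guarded exactly as in the Python (`a`,`b` are `prev`,`next` at a C and `now` at a Z). -/
def pvRelink (t : PySem.Dict Int (Int × Int)) (n prev next a b : Int) :
    PySem.Dict Int (Int × Int) :=
  if prev = -1 then t.modify next (0, 0) (fun v => (a, v.2))
  else if next = n then t.modify prev (0, 0) (fun v => (v.1, b))
  else (t.modify prev (0, 0) (fun v => (v.1, b))).modify next (0, 0) (fun v => (a, v.2))

lemma pvRelink_getD_other {t : PySem.Dict Int (Int × Int)} {n prev next a b j : Int}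
    (h1 : j ≠ prev) (h2 : j ≠ next) :
    (pvRelink t n prev next a b).getD j (0, 0) = t.getD j (0, 0) := by
  unfold pvRelink
  split
  · rw [PySem.Dict.getD_modify, if_neg h2]
  · split
    · rw [PySem.Dict.getD_modify, if_neg h1]
    · rw [PySem.Dict.getD_modify, if_neg h2, PySem.Dict.getD_modify, if_neg h1]

lemma pvRelink_getD_prev {t : PySem.Dict Int (Int × Int)} {n prev next a b : Int}
    (hp : prev ≠ -1) (hpn : prev ≠ next) :
    (pvRelink t n prev next a b).getD prev (0, 0) = ((t.getD prev (0, 0)).1, b) := by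
  unfold pvRelink
  rw [if_neg hp]
  split
  · rw [PySem.Dict.getD_modify, if_pos rfl]
  · rw [PySem.Dict.getD_modify, if_neg hpn, PySem.Dict.getD_modify, if_pos rfl]

lemma pvRelink_getD_next {t : PySem.Dict Int (Int × Int)} {n prev next a b : Int}
    (hn : next ≠ n) (hpn : next ≠ prev) :
    (pvRelink t n prev next a b).getD next (0, 0) = (a, (t.getD next (0, 0)).2) := by
  unfold pvRelink
  split
  · rw [PySem.Dict.getD_modify, if_pos rfl]
  · rw [PySem.Dict.getD_modify, if_pos rfl, PySem.Dict.getD_modify, if_neg hpn]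

-- ---------- removing / restoring one row of the sorted live list ----------

lemma length_small {S : List Int} {q : Nat} (hq : q < S.length) :
    (S.take q ++ S.drop (q + 1)).length + 1 = S.length := by
  rw [List.length_append, List.length_take, List.length_drop]
  omega

lemma getElem_small {S : List Int} {q : Nat} (hq : q < S.length) {q' : Nat}
    (hq' : q' < (S.take q ++ S.drop (q + 1)).length) :
    (S.take q ++ S.drop (q + 1))[q'] =
      if h : q' < q then S[q']'(by omega) else S[q' + 1]'(by have := length_small hq; omega) := by
  have hl := length_small hq
  split
  · rw [List.getElem_append_left (by rw [List.length_take]; omega)]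
    rw [List.getElem_take]
  · rw [List.getElem_append_right (by rw [List.length_take]; omega)]
    rw [List.getElem_drop]
    congr 1
    rw [List.length_take]
    omega

lemma sorted_small {S : List Int} (hS : S.Pairwise (· < ·)) (q : Nat) :
    (S.take q ++ S.drop (q + 1)).Pairwise (· < ·) := by
  apply List.Pairwise.sublist _ hS
  have h1 : (S.drop (q + 1)).Sublist (S.drop q) := by
    by_cases hq : q < S.length
    · rw [List.drop_eq_getElem_cons hq]
      exact (List.sublist_cons_self _ _)
    · rw [List.drop_of_length_le (by omega), List.drop_of_length_le (by omega)]
  calc (S.take q ++ S.drop (q + 1)).Sublist (S.take q ++ S.drop q) :=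
        List.Sublist.append_left h1 _
    _ = S := List.take_append_drop q S

/-- Removing the element at index `q` from a strictly sorted list is `filter (· ≠ S[q])`. -/
lemma filter_ne_eq_small {S : List Int} (hS : S.Pairwise (· < ·)) {q : Nat} (hq : q < S.length)
    {r : Int} (hrq : S[q] = r) :
    S.filter (fun a => decide (a ≠ r)) = S.take q ++ S.drop (q + 1) := by
  have hdrop : S.drop q = r :: S.drop (q + 1) := by
    rw [List.drop_eq_getElem_cons hq, hrq]
  conv_lhs => rw [← List.take_append_drop q S, hdrop]
  rw [List.filter_append, List.filter_cons]
  simp only [ne_eq, not_true_eq_false, decide_false, Bool.false_eq_true, if_false]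
  congr 1
  · apply List.filter_eq_self.mpr
    intro b hb
    have hbf : b ∈ S.filter (fun a => decide (a < S[q])) := by
      rw [filter_lt_eq_take hS hq]; exact hb
    have := (List.mem_filter.mp hbf).2
    simp only [decide_eq_true_eq, hrq] at this
    simp only [ne_eq, decide_eq_true_eq]
    omega
  · apply List.filter_eq_self.mpr
    intro b hb
    rw [← filter_gt_eq_drop hS hq] at hb
    have := (List.mem_filter.mp hb).2
    simp only [decide_eq_true_eq, hrq] at this
    simp only [ne_eq, decide_eq_true_eq]
    omega

lemma alvL_append {n : Int} {dd : List Int} {r : Int} :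
    alvL n (dd ++ [r]) = (alvL n dd).filter (fun a => decide (a ≠ r)) := by
  unfold alvL
  rw [List.filter_filter]
  apply List.filter_congr
  intro i _
  by_cases h1 : i ∈ dd <;> by_cases h2 : i = r <;> simp [h1, h2]

lemma sorted_getElem_mono {S : List Int} (hS : S.Pairwise (· < ·)) {i j : Nat}
    (hij : i < j) (hj : j < S.length) : S[i]'(by omega) < S[j] :=
  (List.pairwise_iff_getElem.mp hS) i j (by omega) hj hij

lemma pvRelink_getD_prev' {t : PySem.Dict Int (Int × Int)} {n prev next a b j : Int}
    (hj : j = prev) (hp : prev ≠ -1) (hpn : prev ≠ next) :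
    (pvRelink t n prev next a b).getD j (0, 0) = ((t.getD j (0, 0)).1, b) := by
  subst hj; exact pvRelink_getD_prev hp hpn

lemma pvRelink_getD_next' {t : PySem.Dict Int (Int × Int)} {n prev next a b j : Int}
    (hj : j = next) (hn : next ≠ n) (hpn : next ≠ prev) :
    (pvRelink t n prev next a b).getD j (0, 0) = (a, (t.getD j (0, 0)).2) := by
  subst hj; exact pvRelink_getD_next hn hpn

/-- Deleting the row `S[q]`: A's relink rewires the table of `S` into the table of
    `S` with index `q` removed. -/
lemma tbl_delete {n : Int} {S : List Int} {t : PySem.Dict Int (Int × Int)}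
    (hS : S.Pairwise (· < ·)) (hb : ∀ j ∈ S, 0 ≤ j ∧ j < n)
    {q : Nat} (hq : q < S.length)
    (htbl : ∀ j ∈ S, t.getD j (0, 0) = (predOf S j, succOf n S j)) :
    ∀ j ∈ S.take q ++ S.drop (q + 1),
      (pvRelink t n (predOf S (S[q])) (succOf n S (S[q]))
          (predOf S (S[q])) (succOf n S (S[q]))).getD j (0, 0) =
        (predOf (S.take q ++ S.drop (q + 1)) j, succOf n (S.take q ++ S.drop (q + 1)) j) := by
  have hl := length_small hq
  have hTs := sorted_small hS (S := S) q
  have hmono : ∀ (i j : Nat) (_ : i < j) (hj : j < S.length), S[i]'(by omega) < S[j] :=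
    fun i j hij hj => sorted_getElem_mono hS hij hj
  have hp0 := predOf_getElem hS hq
  have hn0 := succOf_getElem (n := n) hS hq
  have hqb := hb (S[q]) (List.getElem_mem _)
  intro j hj
  obtain ⟨q', hq', hjq⟩ := List.getElem_of_mem hj
  have hjval := getElem_small hq hq'
  rw [hjq] at hjval
  have hjmem : j ∈ S := by
    rw [hjval]; split <;> exact List.getElem_mem _
  have hjb := hb j hjmem
  have hval := htbl j hjmem
  rw [← hjq, predOf_getElem hTs hq', succOf_getElem hTs hq', hjq]
  by_cases hlt : q' < q
  · have hq'S : q' < S.length := by omega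
    have hjval' : j = S[q']'hq'S := by rw [hjval, dif_pos hlt]
    have hPj : predOf S j = if h : q' = 0 then -1 else S[q' - 1]'(by omega) := by
      rw [hjval']; exact predOf_getElem hS hq'S
    have hSj : succOf n S j = if h : q' + 1 < S.length then S[q' + 1] else n := by
      rw [hjval']; exact succOf_getElem hS hq'S
    by_cases hpe : q' = q - 1
    · have hqpos : 0 < q := by omega
      have hjprev : j = predOf S (S[q]) := by
        rw [hp0, dif_neg (by omega), hjval']
        congr 1
      have hneqn : predOf S (S[q]) ≠ succOf n S (S[q]) := by
        rw [hn0, ← hjprev]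
        by_cases hin : q + 1 < S.length
        · rw [dif_pos hin]
          have := hmono q' (q + 1) (by omega) hin
          rw [← hjval'] at this
          omega
        · rw [dif_neg hin]
          omega
      rw [pvRelink_getD_prev' hjprev (by rw [← hjprev]; omega) hneqn, hval]
      rw [Prod.mk.injEq]
      refine ⟨?_, ?_⟩
      · show predOf S j = _
        rw [hPj]
        by_cases h0 : q' = 0
        · rw [dif_pos h0, dif_pos h0]
        · rw [dif_neg h0, dif_neg h0, getElem_small hq, dif_pos (by omega)]
      · show succOf n S (S[q]) = _
        rw [hn0]
        by_cases hin : q + 1 < S.length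
        · rw [dif_pos hin, dif_pos (by omega), getElem_small hq, dif_neg (by omega)]
          congr 1 <;> omega
        · rw [dif_neg hin, dif_neg (by omega)]
    · have hne1 : j ≠ predOf S (S[q]) := by
        rw [hp0]
        by_cases h0 : q = 0
        · rw [dif_pos h0]; omega
        · rw [dif_neg h0, hjval']
          have := hmono q' (q - 1) (by omega) (by omega)
          omega
      have hne2 : j ≠ succOf n S (S[q]) := by
        rw [hn0]
        by_cases hin : q + 1 < S.length
        · rw [dif_pos hin, hjval']
          have := hmono q' (q + 1) (by omega) hin
          omega
        · rw [dif_neg hin]; omega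
      rw [pvRelink_getD_other hne1 hne2, hval]
      rw [Prod.mk.injEq]
      refine ⟨?_, ?_⟩
      · show predOf S j = _
        rw [hPj]
        by_cases h0 : q' = 0
        · rw [dif_pos h0, dif_pos h0]
        · rw [dif_neg h0, dif_neg h0, getElem_small hq, dif_pos (by omega)]
      · show succOf n S j = _
        rw [hSj]
        rw [dif_pos (by omega), dif_pos (by omega)]
        rw [getElem_small hq, dif_pos (by omega)]
  · have hq1S : q' + 1 < S.length := by omega
    have hjval' : j = S[q' + 1]'hq1S := by rw [hjval, dif_neg hlt]
    have hPj : predOf S j = S[q']'(by omega) := by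
      rw [hjval', predOf_getElem hS hq1S, dif_neg (by omega)]
      congr 1
    have hSj : succOf n S j = if h : q' + 2 < S.length then S[q' + 2] else n := by
      rw [hjval']
      have := succOf_getElem (n := n) hS hq1S
      rw [this]
    by_cases hqe : q' = q
    · have hjsucc : j = succOf n S (S[q]) := by
        rw [hn0, dif_pos (by omega), hjval']
        congr 1 <;> omega
      have hneqp : succOf n S (S[q]) ≠ predOf S (S[q]) := by
        rw [hp0, ← hjsucc]
        by_cases h0 : q = 0
        · rw [dif_pos h0]; omega
        · rw [dif_neg h0]
          have := hmono (q - 1) (q' + 1) (by omega) hq1S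
          rw [← hjval'] at this
          omega
      rw [pvRelink_getD_next' hjsucc (by rw [← hjsucc]; omega) hneqp, hval]
      rw [Prod.mk.injEq]
      refine ⟨?_, ?_⟩
      · show predOf S (S[q]) = _
        rw [hp0]
        by_cases h0 : q' = 0
        · rw [dif_pos (by omega), dif_pos h0]
        · rw [dif_neg (by omega), dif_neg h0, getElem_small hq, dif_pos (by omega)]
          congr 1 <;> omega
      · show succOf n S j = _
        rw [hSj]
        by_cases h2 : q' + 2 < S.length
        · rw [dif_pos h2, dif_pos (by omega), getElem_small hq, dif_neg (by omega)]
        · rw [dif_neg h2, dif_neg (by omega)]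
    · have hgt : q < q' := by omega
      have hne1 : j ≠ predOf S (S[q]) := by
        rw [hp0]
        by_cases h0 : q = 0
        · rw [dif_pos h0]; omega
        · rw [dif_neg h0, hjval']
          have := hmono (q - 1) (q' + 1) (by omega) hq1S
          omega
      have hne2 : j ≠ succOf n S (S[q]) := by
        rw [hn0]
        by_cases hin : q + 1 < S.length
        · rw [dif_pos hin, hjval']
          have := hmono (q + 1) (q' + 1) (by omega) hq1S
          omega
        · rw [dif_neg hin]; omega
      rw [pvRelink_getD_other hne1 hne2, hval]
      rw [Prod.mk.injEq]
      refine ⟨?_, ?_⟩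
      · show predOf S j = _
        rw [hPj]
        rw [dif_neg (by omega), getElem_small hq, dif_neg (by omega)]
        congr 1 <;> omega
      · show succOf n S j = _
        rw [hSj]
        by_cases h2 : q' + 2 < S.length
        · rw [dif_pos h2, dif_pos (by omega), getElem_small hq, dif_neg (by omega)]
        · rw [dif_neg h2, dif_neg (by omega)]

/-- Restoring the row `r = S[q]`: A's relink rewires the table of `S` minus index `q`
    back into the table of `S`, given that `r`'s own stale entry still holds its
    delete-time neighbours. -/
lemma tbl_insert {n : Int} {S : List Int} {t : PySem.Dict Int (Int × Int)}
    (hS : S.Pairwise (· < ·)) (hb : ∀ j ∈ S, 0 ≤ j ∧ j < n)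
    {q : Nat} (hq : q < S.length)
    (htbl : ∀ j ∈ S.take q ++ S.drop (q + 1),
      t.getD j (0, 0) = (predOf (S.take q ++ S.drop (q + 1)) j,
                         succOf n (S.take q ++ S.drop (q + 1)) j))
    (htr : t.getD (S[q]) (0, 0) = (predOf S (S[q]), succOf n S (S[q]))) :
    ∀ j ∈ S,
      (pvRelink t n (predOf S (S[q])) (succOf n S (S[q])) (S[q]) (S[q])).getD j (0, 0) =
        (predOf S j, succOf n S j) := by
  have hl := length_small hq
  have hTs := sorted_small hS (S := S) q
  have hmono : ∀ (i j : Nat) (_ : i < j) (hj : j < S.length), S[i]'(by omega) < S[j] :=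
    fun i j hij hj => sorted_getElem_mono hS hij hj
  have hp0 := predOf_getElem hS hq
  have hn0 := succOf_getElem (n := n) hS hq
  have hqb := hb (S[q]) (List.getElem_mem _)
  intro j hjmem
  obtain ⟨q0, hq0, hjq⟩ := List.getElem_of_mem hjmem
  have hjb := hb j hjmem
  rw [← hjq, predOf_getElem hS hq0, succOf_getElem hS hq0, hjq]
  by_cases hqq : q0 = q
  · have hjr : j = S[q] := by
      rw [← hjq]
      congr 1
    have hne1 : j ≠ predOf S (S[q]) := by
      rw [hp0]
      by_cases h0 : q = 0
      · rw [dif_pos h0]; omega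
      · rw [dif_neg h0, hjr]
        have := hmono (q - 1) q (by omega) hq
        omega
    have hne2 : j ≠ succOf n S (S[q]) := by
      rw [hn0]
      by_cases hin : q + 1 < S.length
      · rw [dif_pos hin, hjr]
        have := hmono q (q + 1) (by omega) hin
        omega
      · rw [dif_neg hin]; omega
    rw [pvRelink_getD_other hne1 hne2, hjr, htr, hp0, hn0]
    rw [Prod.mk.injEq]
    refine ⟨?_, ?_⟩
    · by_cases h0 : q = 0
      · rw [dif_pos h0, dif_pos (by omega)]
      · rw [dif_neg h0, dif_neg (by omega)]
        congr 1 <;> omega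
    · by_cases hin : q + 1 < S.length
      · rw [dif_pos hin, dif_pos (by omega)]
        congr 1 <;> omega
      · rw [dif_neg hin, dif_neg (by omega)]
  · by_cases hqp : q0 + 1 = q
    · have hjprev : j = predOf S (S[q]) := by
        rw [hp0, dif_neg (by omega), ← hjq]
        congr 1 <;> omega
      have hneqn : predOf S (S[q]) ≠ succOf n S (S[q]) := by
        rw [hn0, ← hjprev]
        by_cases hin : q + 1 < S.length
        · rw [dif_pos hin, ← hjq]
          have := hmono q0 (q + 1) (by omega) hin
          omega
        · rw [dif_neg hin]; omega
      have hjT' : j = (S.take q ++ S.drop (q + 1))[q0]'(by omega) := by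
        rw [getElem_small hq, dif_pos (by omega), ← hjq]
      have hjT : j ∈ S.take q ++ S.drop (q + 1) := by
        rw [hjT']; exact List.getElem_mem _
      rw [pvRelink_getD_prev' hjprev (by rw [← hjprev]; omega) hneqn, htbl j hjT]
      rw [Prod.mk.injEq]
      refine ⟨?_, ?_⟩
      · rw [show predOf (S.take q ++ S.drop (q + 1)) j =
              predOf (S.take q ++ S.drop (q + 1)) ((S.take q ++ S.drop (q + 1))[q0]'(by omega))
            by rw [← hjT']]
        rw [predOf_getElem hTs (by omega)]
        by_cases h0 : q0 = 0
        · rw [dif_pos h0, dif_pos h0]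
        · rw [dif_neg h0, dif_neg h0, getElem_small hq, dif_pos (by omega)]
      · rw [dif_pos (by omega)]
        congr 1 <;> omega
    · by_cases hqn : q0 = q + 1
      · have hjsucc : j = succOf n S (S[q]) := by
          rw [hn0, dif_pos (by omega), ← hjq]
          congr 1
        have hneqp : succOf n S (S[q]) ≠ predOf S (S[q]) := by
          rw [hp0, ← hjsucc]
          by_cases h0 : q = 0
          · rw [dif_pos h0]; omega
          · rw [dif_neg h0, ← hjq]
            have := hmono (q - 1) q0 (by omega) hq0
            omega
        have hq0T : q0 - 1 < (S.take q ++ S.drop (q + 1)).length := by omega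
        have hjT' : j = (S.take q ++ S.drop (q + 1))[q0 - 1]'hq0T := by
          rw [getElem_small hq, dif_neg (by omega), ← hjq]
          congr 1 <;> omega
        have hjT : j ∈ S.take q ++ S.drop (q + 1) := by
          rw [hjT']; exact List.getElem_mem _
        rw [pvRelink_getD_next' hjsucc (by rw [← hjsucc]; omega) hneqp, htbl j hjT]
        rw [Prod.mk.injEq]
        refine ⟨?_, ?_⟩
        · rw [dif_neg (by omega)]
          congr 1 <;> omega
        · rw [show succOf n (S.take q ++ S.drop (q + 1)) j =
                succOf n (S.take q ++ S.drop (q + 1))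
                  ((S.take q ++ S.drop (q + 1))[q0 - 1]'hq0T) by rw [← hjT']]
          rw [succOf_getElem hTs hq0T]
          by_cases h2 : q0 + 1 < S.length
          · have hcond : q0 - 1 + 1 < (List.take q S ++ List.drop (q + 1) S).length := by omega
            have hcond2 : ¬ (q0 - 1 + 1 < q) := by omega
            rw [dif_pos hcond, dif_pos h2, getElem_small hq, dif_neg hcond2]
            simp only [show q0 - 1 + 1 + 1 = q0 + 1 from by omega]
          · have hcond : ¬ (q0 - 1 + 1 < (List.take q S ++ List.drop (q + 1) S).length) := by
              omega
            rw [dif_neg hcond, dif_neg h2]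
      · have hne1 : j ≠ predOf S (S[q]) := by
          rw [hp0]
          by_cases h0 : q = 0
          · rw [dif_pos h0]; omega
          · rw [dif_neg h0, ← hjq]
            rcases Nat.lt_or_ge q0 (q - 1) with h | h
            · have := hmono q0 (q - 1) h (by omega); omega
            · have := hmono (q - 1) q0 (by omega) hq0; omega
        have hne2 : j ≠ succOf n S (S[q]) := by
          rw [hn0]
          by_cases hin : q + 1 < S.length
          · rw [dif_pos hin, ← hjq]
            rcases Nat.lt_or_ge q0 (q + 1) with h | h
            · have := hmono q0 (q + 1) h hin; omega
            · have := hmono (q + 1) q0 (by omega) hq0; omega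
          · rw [dif_neg hin]
            omega
        rw [pvRelink_getD_other hne1 hne2]
        by_cases hlt : q0 < q
        · have hq0T : q0 < (S.take q ++ S.drop (q + 1)).length := by omega
          have hjT' : j = (S.take q ++ S.drop (q + 1))[q0]'hq0T := by
            rw [getElem_small hq, dif_pos (by omega), ← hjq]
          have hjT : j ∈ S.take q ++ S.drop (q + 1) := by
            rw [hjT']; exact List.getElem_mem _
          rw [htbl j hjT]
          rw [Prod.mk.injEq]
          refine ⟨?_, ?_⟩
          · rw [show predOf (S.take q ++ S.drop (q + 1)) j =
                  predOf (S.take q ++ S.drop (q + 1))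
                    ((S.take q ++ S.drop (q + 1))[q0]'hq0T) by rw [← hjT']]
            rw [predOf_getElem hTs hq0T]
            by_cases h0 : q0 = 0
            · rw [dif_pos h0, dif_pos h0]
            · rw [dif_neg h0, dif_neg h0, getElem_small hq, dif_pos (by omega)]
          · rw [show succOf n (S.take q ++ S.drop (q + 1)) j =
                  succOf n (S.take q ++ S.drop (q + 1))
                    ((S.take q ++ S.drop (q + 1))[q0]'hq0T) by rw [← hjT']]
            rw [succOf_getElem hTs hq0T]
            rw [dif_pos (by omega), dif_pos (by omega), getElem_small hq, dif_pos (by omega)]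
        · have hgt : q + 1 < q0 := by omega
          have hq0T : q0 - 1 < (S.take q ++ S.drop (q + 1)).length := by omega
          have hjT' : j = (S.take q ++ S.drop (q + 1))[q0 - 1]'hq0T := by
            rw [getElem_small hq, dif_neg (by omega), ← hjq]
            congr 1 <;> omega
          have hjT : j ∈ S.take q ++ S.drop (q + 1) := by
            rw [hjT']; exact List.getElem_mem _
          rw [htbl j hjT]
          rw [Prod.mk.injEq]
          refine ⟨?_, ?_⟩
          · rw [show predOf (S.take q ++ S.drop (q + 1)) j =
                  predOf (S.take q ++ S.drop (q + 1))
                    ((S.take q ++ S.drop (q + 1))[q0 - 1]'hq0T) by rw [← hjT']]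
            rw [predOf_getElem hTs hq0T]
            rw [dif_neg (by omega), dif_neg (by omega), getElem_small hq, dif_neg (by omega)]
            congr 1 <;> omega
          · rw [show succOf n (S.take q ++ S.drop (q + 1)) j =
                  succOf n (S.take q ++ S.drop (q + 1))
                    ((S.take q ++ S.drop (q + 1))[q0 - 1]'hq0T) by rw [← hjT']]
            rw [succOf_getElem hTs hq0T]
            by_cases h2 : q0 + 1 < S.length
            · rw [dif_pos (by omega), dif_pos h2, getElem_small hq, dif_neg (by omega)]
              congr 1 <;> omega
            · rw [dif_neg (by omega), dif_neg h2]

-- ---------- the rank at which a restored row re-enters ----------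

/-- `r - #{d ∈ dd : d < r}` is the index of the live row `r` in the live list. -/
lemma rank_idx {n : Int} {dd : List Int} (hnd : dd.Nodup)
    (hm : ∀ d ∈ dd, 0 ≤ d ∧ d < n) {r : Int} (hr : r ∈ alvL n dd) :
    0 ≤ r - (dd.countP (fun d => decide (d < r)) : Int) ∧
    ∃ h : (r - (dd.countP (fun d => decide (d < r)) : Int)).toNat < (alvL n dd).length,
      (alvL n dd)[(r - (dd.countP (fun d => decide (d < r)) : Int)).toNat] = r := by
  have hrb := mem_alvL.mp hr
  obtain ⟨q, hq, hqr⟩ := List.getElem_of_mem hr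
  have hS := sorted_alvL n dd
  have hfilter : (alvL n dd).filter (fun a => decide (a < r)) =
      (PySem.List.pyRange 0 r 1).filter (fun i => decide (i ∉ dd)) := by
    unfold alvL
    rw [PySem.List.pyRange_one_append 0 r n (by omega) (by omega), List.filter_append,
      List.filter_append]
    have h1 : List.filter (fun a => decide (a < r))
        (List.filter (fun i => decide (i ∉ dd)) (PySem.List.pyRange 0 r 1)) =
        List.filter (fun i => decide (i ∉ dd)) (PySem.List.pyRange 0 r 1) := by
      apply List.filter_eq_self.mpr
      intro b hb
      have := (List.mem_filter.mp hb).1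
      rw [PySem.List.mem_pyRange_one] at this
      simp only [decide_eq_true_eq]
      omega
    have h2 : List.filter (fun a => decide (a < r))
        (List.filter (fun i => decide (i ∉ dd)) (PySem.List.pyRange r n 1)) = [] := by
      apply List.filter_eq_nil_iff.mpr
      intro b hb
      have := (List.mem_filter.mp hb).1
      rw [PySem.List.mem_pyRange_one] at this
      simp only [decide_eq_true_eq]
      omega
    rw [h1, h2, List.append_nil]
  have hsub : alvL r (dd.filter (fun d => decide (d < r))) =
      (PySem.List.pyRange 0 r 1).filter (fun i => decide (i ∉ dd)) := by
    unfold alvL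
    apply List.filter_congr
    intro i hi
    rw [PySem.List.mem_pyRange_one] at hi
    by_cases hid : i ∈ dd
    · simp [hid, List.mem_filter]
      omega
    · simp [hid, List.mem_filter]
  have hlen := length_alvL (n := r) (dd := dd.filter (fun d => decide (d < r)))
    (hnd.filter _) (by
      intro d hd
      rw [List.mem_filter] at hd
      have := hm d hd.1
      have := of_decide_eq_true hd.2
      omega)
  have hidx : ((alvL n dd).filter (fun a => decide (a < r))).length = q := by
    rw [show (fun a => decide (a < r)) = (fun a : Int => decide (a < (alvL n dd)[q])) by
      rw [hqr]]
    rw [filter_lt_eq_take hS hq, List.length_take]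
    omega
  have hcnt : dd.countP (fun d => decide (d < r)) =
      (dd.filter (fun d => decide (d < r))).length := by
    rw [List.countP_eq_length_filter]
  have hq' : (q : Int) = r - (dd.countP (fun d => decide (d < r)) : Int) := by
    rw [← hidx, hfilter, ← hsub, hcnt]
    omega
  have htq : (r - (dd.countP (fun d => decide (d < r)) : Int)).toNat = q := by omega
  refine ⟨by omega, by omega, ?_⟩
  simp only [htq]
  exact hqr

-- ---------- the answer array as a map over range(n) ----------

lemma map_range_set {n r : Int} (h0 : 0 ≤ r) (_h1 : r < n) (f : Int → String) (v : String) :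
    ((PySem.List.pyRange 0 n 1).map f).set r.toNat v =
      (PySem.List.pyRange 0 n 1).map (fun i => if i = r then v else f i) := by
  apply List.ext_getElem
  · simp
  · intro i hi1 hi2
    simp only [List.length_set, List.length_map, PySem.List.length_pyRange_one] at hi1
    rw [List.getElem_set, List.getElem_map, List.getElem_map, PySem.List.getElem_pyRange_one]
    by_cases hir : r.toNat = i
    · rw [if_pos hir, if_pos (by omega)]
    · rw [if_neg hir, if_neg (by omega)]

/-- Marking one more deleted row in the answer array. -/
lemma ans_mark_X {n r : Int} {dd : List Int} (h0 : 0 ≤ r) (h1 : r < n) :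
    ((PySem.List.pyRange 0 n 1).map (fun i => if i ∈ dd then "X" else "O")).set r.toNat "X" =
      (PySem.List.pyRange 0 n 1).map (fun i => if i ∈ dd ++ [r] then "X" else "O") := by
  rw [map_range_set h0 h1]
  apply List.map_congr_left
  intro i _
  by_cases hir : i = r
  · simp [hir]
  · by_cases hid : i ∈ dd <;> simp [hir, hid]

/-- Unmarking the restored row in the answer array. -/
lemma ans_mark_O {n r : Int} {dd : List Int} (h0 : 0 ≤ r) (h1 : r < n) (hnr : r ∉ dd) :
    ((PySem.List.pyRange 0 n 1).map (fun i => if i ∈ dd ++ [r] then "X" else "O")).set r.toNat "O" =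
      (PySem.List.pyRange 0 n 1).map (fun i => if i ∈ dd then "X" else "O") := by
  rw [map_range_set h0 h1]
  apply List.map_congr_left
  intro i _
  by_cases hir : i = r
  · subst hir
    simp [hnr]
  · by_cases hid : i ∈ dd <;> simp [hir, hid]

/-- B's final pass paints exactly the deleted rows. -/
lemma resB_eq {n : Int} : ∀ (dd : List Int), (∀ d ∈ dd, 0 ≤ d ∧ d < n) →
    dd.foldl (fun res d => PySem.List.pySetD res d "X") (PySem.List.pyRepeat ["O"] n) =
      (PySem.List.pyRange 0 n 1).map (fun i => if i ∈ dd then "X" else "O") := by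
  intro dd
  induction dd using List.reverseRecOn with
  | nil =>
    intro _
    rw [PySem.List.pyRepeat_singleton]
    simp only [List.not_mem_nil, if_false, List.foldl_nil]
    rw [List.map_const', PySem.List.length_pyRange_one]
    congr 1
    omega
  | append_singleton dd d ih =>
    intro hm
    rw [List.foldl_append]
    simp only [List.foldl_cons, List.foldl_nil]
    rw [ih (fun x hx => hm x (by simp [hx]))]
    have hd := hm d (by simp)
    rw [PySem.List.pySetD_of_nonneg _ _ hd.1]
    exact ans_mark_X hd.1 hd.2

-- ---------- neighbours seen from the removed row itself ----------

lemma predOf_small_self {S : List Int} (hS : S.Pairwise (· < ·)) {q : Nat} (hq : q < S.length)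
    {r : Int} (hrq : S[q] = r) :
    predOf (S.take q ++ S.drop (q + 1)) r = predOf S r := by
  unfold predOf
  congr 1
  rw [List.filter_append]
  have h1 : List.filter (fun a => decide (a < r)) (S.take q) = S.take q := by
    apply List.filter_eq_self.mpr
    intro b hb
    have hbf : b ∈ S.filter (fun a => decide (a < S[q])) := by
      rw [filter_lt_eq_take hS hq]; exact hb
    have := (List.mem_filter.mp hbf).2
    rw [hrq] at this
    exact this
  have h2 : List.filter (fun a => decide (a < r)) (S.drop (q + 1)) = [] := by
    apply List.filter_eq_nil_iff.mpr
    intro b hb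
    rw [← filter_gt_eq_drop hS hq] at hb
    have := (List.mem_filter.mp hb).2
    simp only [decide_eq_true_eq, hrq] at this ⊢
    omega
  rw [h1, h2, List.append_nil]
  conv_rhs => rw [← hrq, filter_lt_eq_take hS hq]

lemma succOf_small_self {n : Int} {S : List Int} (hS : S.Pairwise (· < ·)) {q : Nat}
    (hq : q < S.length) {r : Int} (hrq : S[q] = r) :
    succOf n (S.take q ++ S.drop (q + 1)) r = succOf n S r := by
  unfold succOf
  congr 1
  rw [List.filter_append]
  have h1 : List.filter (fun a => decide (r < a)) (S.take q) = [] := by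
    apply List.filter_eq_nil_iff.mpr
    intro b hb
    have hbf : b ∈ S.filter (fun a => decide (a < S[q])) := by
      rw [filter_lt_eq_take hS hq]; exact hb
    have := (List.mem_filter.mp hbf).2
    simp only [decide_eq_true_eq, hrq] at this ⊢
    omega
  have h2 : List.filter (fun a => decide (r < a)) (S.drop (q + 1)) = S.drop (q + 1) := by
    apply List.filter_eq_self.mpr
    intro b hb
    rw [← filter_gt_eq_drop hS hq] at hb
    have := (List.mem_filter.mp hb).2
    rw [hrq] at this
    exact this
  rw [h1, h2, List.nil_append]
  conv_rhs => rw [← hrq, filter_gt_eq_drop hS hq]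

lemma predOf_mem (S : List Int) (r : Int) :
    predOf S r = -1 ∨ (predOf S r ∈ S ∧ predOf S r < r) := by
  unfold predOf
  cases hL : (S.filter (fun a => decide (a < r))).getLast? with
  | none => left; rfl
  | some v =>
    right
    have hm := List.mem_of_getLast? hL
    refine ⟨(List.mem_filter.mp hm).1, ?_⟩
    have := (List.mem_filter.mp hm).2
    simpa using this

lemma succOf_mem (n : Int) (S : List Int) (r : Int) :
    succOf n S r = n ∨ (succOf n S r ∈ S ∧ r < succOf n S r) := by
  unfold succOf
  cases hL : (S.filter (fun a => decide (r < a))).head? with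
  | none => left; rfl
  | some v =>
    right
    have hm := List.mem_of_mem_head? hL
    refine ⟨(List.mem_filter.mp hm).1, ?_⟩
    have := (List.mem_filter.mp hm).2
    simpa using this

-- ---------- little getD helpers for the stack lists ----------

lemma getD_append_lt {α : Type} [Inhabited α] (l : List α) (e : α) (i : Nat) (d : α)
    (h : i < l.length) : (l ++ [e]).getD i d = l.getD i d := by
  rw [List.getD_eq_getElem _ _ (by simp; omega), List.getD_eq_getElem _ _ h,
    List.getElem_append_left h]

lemma getD_append_last {α : Type} [Inhabited α] (l : List α) (e : α) (d : α) :
    (l ++ [e]).getD l.length d = e := by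
  rw [List.getD_eq_getElem _ _ (by simp)]
  rw [List.getElem_append_right (by omega)]
  simp

lemma getD_dropLast {α : Type} [Inhabited α] (l : List α) (i : Nat) (d : α)
    (h : i < l.length - 1) : l.dropLast.getD i d = l.getD i d := by
  rw [List.getD_eq_getElem _ _ (by rw [List.length_dropLast]; omega),
    List.getD_eq_getElem _ _ (by omega)]
  rw [List.getElem_dropLast]

lemma take_dropLast_eq {α : Type} (l : List α) (i : Nat) (h : i ≤ l.length - 1) :
    l.dropLast.take i = l.take i := by
  rw [List.dropLast_eq_take, List.take_take]
  congr 1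
  omega

-- ---------- the cursor as a getElem ----------

lemma cur_getElem {n pos : Int} {dd : List Int}
    {A : List String × PySem.Dict Int (Int × Int) × List (Int × Int × Int) × Int}
    (hInv : PvInv n pos dd A) (h0 : 0 ≤ pos) (h1 : pos < n - dd.length) :
    ∃ h : pos.toNat < (alvL n dd).length, A.2.2.2 = (alvL n dd)[pos.toNat] := by
  have hlen := length_alvL_int hInv.nodup hInv.mem (by omega)
  have hl : pos.toNat < (alvL n dd).length := by omega
  refine ⟨hl, ?_⟩
  rcases hInv.cur with ⟨hdd, hk⟩ | ⟨_, _, hk⟩ | ⟨hp, _⟩ | ⟨hp, _⟩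
  · subst hdd
    rw [hk]
    have hA : alvL n [] = PySem.List.pyRange 0 n 1 := by
      unfold alvL; rw [List.filter_eq_self.mpr]; intro b _; simp
    rw [List.getElem_of_eq hA, PySem.List.getElem_pyRange_one]
    omega
  · rw [hk, List.getD_eq_getElem _ _ hl]
  · omega
  · omega

-- ---------- invariant preservation, one lemma per command ----------

lemma pvInvD {n pos x : Int} {dd : List Int}
    {A : List String × PySem.Dict Int (Int × Int) × List (Int × Int × Int) × Int}
    (hInv : PvInv n pos dd A) (h0 : 0 ≤ pos) (hx : 1 ≤ x) (h1 : pos + x ≤ n - dd.length) :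
    PvInv n (pos + x) dd
      (A.1, A.2.1, A.2.2.1, (fun j => (A.2.1.getD j (0, 0)).2)^[x.toNat] A.2.2.2) := by
  have hS := sorted_alvL n dd
  have hlen := length_alvL_int hInv.nodup hInv.mem (by omega)
  obtain ⟨hl, hk⟩ := cur_getElem hInv h0 (by omega)
  constructor
  · exact hInv.nodup
  · exact hInv.mem
  · exact hInv.ans
  · by_cases hsent : pos + x = n - (dd.length : Int)
    · refine Or.inr (Or.inr (Or.inr ⟨hsent, ?_⟩))
      show (fun j => (A.2.1.getD j (0, 0)).2)^[x.toNat] A.2.2.2 = n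
      rw [hk]
      exact walk_next_sentinel hS hInv.tbl x.toNat pos.toNat (by omega) (by omega) hl
    · refine Or.inr (Or.inl ⟨by omega, by omega, ?_⟩)
      show (fun j => (A.2.1.getD j (0, 0)).2)^[x.toNat] A.2.2.2 = _
      rw [hk, walk_next hS hInv.tbl x.toNat pos.toNat (by omega)]
      rw [List.getD_eq_getElem _ _ (by omega)]
      simp only [show pos.toNat + x.toNat = (pos + x).toNat from by omega]
  · exact hInv.tbl
  · exact hInv.stkLen
  · exact hInv.stk
  · exact hInv.tblDead

lemma pvInvU {n pos x : Int} {dd : List Int}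
    {A : List String × PySem.Dict Int (Int × Int) × List (Int × Int × Int) × Int}
    (hInv : PvInv n pos dd A) (h0 : 0 ≤ pos) (h1 : pos < n - dd.length) (hx : 1 ≤ x)
    (h2 : -1 ≤ pos - x) :
    PvInv n (pos - x) dd
      (A.1, A.2.1, A.2.2.1, (fun j => (A.2.1.getD j (0, 0)).1)^[x.toNat] A.2.2.2) := by
  have hS := sorted_alvL n dd
  have hlen := length_alvL_int hInv.nodup hInv.mem (by omega)
  obtain ⟨hl, hk⟩ := cur_getElem hInv h0 h1
  constructor
  · exact hInv.nodup
  · exact hInv.mem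
  · exact hInv.ans
  · by_cases hsent : pos - x = -1
    · refine Or.inr (Or.inr (Or.inl ⟨hsent, ?_⟩))
      show (fun j => (A.2.1.getD j (0, 0)).1)^[x.toNat] A.2.2.2 = -1
      rw [hk]
      exact walk_prev_sentinel hS hInv.tbl x.toNat pos.toNat (by omega) hl
    · refine Or.inr (Or.inl ⟨by omega, by omega, ?_⟩)
      show (fun j => (A.2.1.getD j (0, 0)).1)^[x.toNat] A.2.2.2 = _
      rw [hk, walk_prev hS hInv.tbl x.toNat pos.toNat (by omega) hl]
      rw [List.getD_eq_getElem _ _ (by omega)]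
      simp only [show pos.toNat - x.toNat = (pos - x).toNat from by omega]
  · exact hInv.tbl
  · exact hInv.stkLen
  · exact hInv.stk
  · exact hInv.tblDead

lemma pvInvC {n pos : Int} {dd : List Int}
    {A : List String × PySem.Dict Int (Int × Int) × List (Int × Int × Int) × Int}
    (hInv : PvInv n pos dd A) (h0 : 0 ≤ pos) (h1 : pos < n - dd.length)
    (h2 : 2 ≤ n - dd.length) :
    PvInv n (if pos = n - (((dd ++ [pvSelect dd pos]).length : Nat) : Int) then pos - 1 else pos)
      (dd ++ [pvSelect dd pos])
      (A.1.set A.2.2.2.toNat "X",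
       pvRelink A.2.1 n (A.2.1.getD A.2.2.2 (0, 0)).1 (A.2.1.getD A.2.2.2 (0, 0)).2
         (A.2.1.getD A.2.2.2 (0, 0)).1 (A.2.1.getD A.2.2.2 (0, 0)).2,
       A.2.2.1 ++ [((A.2.1.getD A.2.2.2 (0, 0)).1, (A.2.1.getD A.2.2.2 (0, 0)).2, A.2.2.2)],
       if (A.2.1.getD A.2.2.2 (0, 0)).2 = n then (A.2.1.getD A.2.2.2 (0, 0)).1
       else (A.2.1.getD A.2.2.2 (0, 0)).2) := by
  have hS := sorted_alvL n dd
  have hlen := length_alvL_int hInv.nodup hInv.mem (by omega)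
  obtain ⟨hl, hk⟩ := cur_getElem hInv h0 h1
  have hrsel : pvSelect dd pos = (alvL n dd)[pos.toNat] := by
    rw [pvSelect_eq hInv.nodup hInv.mem h0 hl, List.getD_eq_getElem _ _ hl]
  have hrb := mem_alvL.mp (List.getElem_mem hl)
  have hrdd : (alvL n dd)[pos.toNat] ∉ dd := hrb.2
  have hpn : A.2.1.getD A.2.2.2 (0, 0) =
      (predOf (alvL n dd) ((alvL n dd)[pos.toNat]), succOf n (alvL n dd) ((alvL n dd)[pos.toNat])) := by
    rw [hk]
    exact hInv.tbl _ (List.getElem_mem hl)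
  have hp0 := predOf_getElem hS hl
  have hn0 := succOf_getElem (n := n) hS hl
  have hSeq : alvL n (dd ++ [pvSelect dd pos]) =
      (alvL n dd).take pos.toNat ++ (alvL n dd).drop (pos.toNat + 1) := by
    rw [hrsel, alvL_append, filter_ne_eq_small hS hl rfl]
  have hlsm := length_small hl
  have hnd' : (dd ++ [pvSelect dd pos]).Nodup := by
    rw [List.nodup_append]
    refine ⟨hInv.nodup, List.nodup_singleton _, ?_⟩
    intro a ha b hb
    have hab : b = pvSelect dd pos := by simpa using hb
    subst hab
    intro hc
    rw [hc, hrsel] at ha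
    exact hrdd ha
  have hmem' : ∀ d ∈ dd ++ [pvSelect dd pos], 0 ≤ d ∧ d < n := by
    intro d hd
    rcases List.mem_append.mp hd with h | h
    · exact hInv.mem d h
    · simp only [List.mem_singleton] at h
      subst h
      rw [hrsel]
      exact hrb.1
  have hlapp : ((dd ++ [pvSelect dd pos]).length : Int) = (dd.length : Int) + 1 := by
    simp
  constructor
  · exact hnd'
  · exact hmem'
  · show A.1.set A.2.2.2.toNat "X" = _
    rw [hInv.ans, hk, hrsel]
    exact ans_mark_X hrb.1.1 hrb.1.2
  · refine Or.inr (Or.inl ?_)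
    have hlnat : (dd ++ [pvSelect dd pos]).length = dd.length + 1 := by simp
    rw [hlnat]
    have hiff : (pos = n - (((dd.length + 1 : Nat) : Nat) : Int)) ↔
        pos.toNat + 1 = (alvL n dd).length := by
      push_cast
      omega
    by_cases hcond : pos = n - (((dd.length + 1 : Nat) : Nat) : Int)
    · rw [if_pos hcond]
      have hq1 : pos.toNat + 1 = (alvL n dd).length := hiff.mp hcond
      have hqpos : 0 < pos.toNat := by omega
      refine ⟨by omega, by omega, ?_⟩
      show (if (A.2.1.getD A.2.2.2 (0, 0)).2 = n then _ else _) = _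
      rw [hpn]
      simp only [hn0, hp0]
      rw [dif_neg (by omega), if_pos rfl, dif_neg (by omega)]
      rw [hSeq, List.getD_eq_getElem _ _ (by omega)]
      rw [getElem_small hl, dif_pos (by omega)]
      congr 1 <;> omega
    · rw [if_neg hcond]
      have hq1 : pos.toNat + 1 < (alvL n dd).length := by omega
      refine ⟨by omega, by omega, ?_⟩
      show (if (A.2.1.getD A.2.2.2 (0, 0)).2 = n then _ else _) = _
      rw [hpn]
      simp only [hn0]
      rw [dif_pos hq1]
      rw [if_neg (by have := (mem_alvL.mp (List.getElem_mem hq1)).1; omega)]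
      rw [hSeq, List.getD_eq_getElem _ _ (by omega)]
      rw [getElem_small hl, dif_neg (by omega)]
  · intro j hj
    rw [hSeq] at hj ⊢
    show (pvRelink A.2.1 n _ _ _ _).getD j (0, 0) = _
    rw [hpn]
    exact tbl_delete hS (fun j hj => (mem_alvL.mp hj).1) hl hInv.tbl j hj
  · show (A.2.2.1 ++ _).length = _
    simp [hInv.stkLen]
  · intro i hi
    rw [List.length_append, List.length_singleton] at hi
    by_cases hilt : i < dd.length
    · show (A.2.2.1 ++ _).getD i (0, 0, 0) = _
      rw [getD_append_lt _ _ _ _ (by rw [hInv.stkLen]; exact hilt)]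
      rw [List.take_append_of_le_length (by omega), getD_append_lt _ _ _ _ hilt]
      exact hInv.stk i hilt
    · have hieq : i = dd.length := by omega
      subst hieq
      show (A.2.2.1 ++ [_]).getD dd.length (0, 0, 0) = _
      rw [show dd.length = A.2.2.1.length from hInv.stkLen.symm, getD_append_last]
      rw [hInv.stkLen, getD_append_last]
      rw [show (dd ++ [pvSelect dd pos]).take (dd.length + 1) = dd ++ [pvSelect dd pos] from by
        rw [show dd.length + 1 = (dd ++ [pvSelect dd pos]).length from by simp, List.take_length]]
      rw [hpn, hk, hSeq]
      rw [predOf_small_self hS hl hrsel.symm, succOf_small_self hS hl hrsel.symm]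
      rw [hrsel]
  · intro i hi
    rw [List.length_append, List.length_singleton] at hi
    have hwp := predOf_mem (alvL n dd) ((alvL n dd)[pos.toNat])
    have hwn := succOf_mem n (alvL n dd) ((alvL n dd)[pos.toNat])
    by_cases hilt : i < dd.length
    · have hθ : (dd ++ [pvSelect dd pos]).getD i 0 = dd.getD i 0 := getD_append_lt _ _ _ _ hilt
      rw [hθ, List.take_append_of_le_length (by omega)]
      have hθdd : dd.getD i 0 ∈ dd := by
        rw [List.getD_eq_getElem _ _ hilt]
        exact List.getElem_mem _
      have hθb := hInv.mem _ hθdd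
      show (pvRelink A.2.1 n _ _ _ _).getD _ (0, 0) = _
      rw [hpn]
      rw [pvRelink_getD_other (by
          rcases hwp with h | ⟨h, _⟩
          · rw [h]; omega
          · intro hc
            rw [hc] at hθdd
            exact (mem_alvL.mp h).2 hθdd)
        (by
          rcases hwn with h | ⟨h, _⟩
          · rw [h]; omega
          · intro hc
            rw [hc] at hθdd
            exact (mem_alvL.mp h).2 hθdd)]
      exact hInv.tblDead i hilt
    · have hieq : i = dd.length := by omega
      subst hieq
      rw [getD_append_last]
      rw [show (dd ++ [pvSelect dd pos]).take (dd.length + 1) = dd ++ [pvSelect dd pos] from by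
        rw [show dd.length + 1 = (dd ++ [pvSelect dd pos]).length from by simp, List.take_length]]
      show (pvRelink A.2.1 n _ _ _ _).getD _ (0, 0) = _
      rw [hpn]
      rw [pvRelink_getD_other (by
          rw [hrsel]
          rcases hwp with h | ⟨_, h⟩
          · rw [h]; omega
          · omega)
        (by
          rw [hrsel]
          rcases hwn with h | ⟨_, h⟩
          · rw [h]
            have := hrb.1.2
            omega
          · omega)]
      rw [hSeq, hrsel, hInv.tbl _ (List.getElem_mem hl)]
      rw [predOf_small_self hS hl rfl, succOf_small_self hS hl rfl]

lemma pvInvZ {n pos : Int} {dd : List Int}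
    {A : List String × PySem.Dict Int (Int × Int) × List (Int × Int × Int) × Int}
    (hInv : PvInv n pos dd A) (hne : dd ≠ []) :
    A.2.2.1.getLast? = some (predOf (alvL n dd) (dd.getLast hne),
      succOf n (alvL n dd) (dd.getLast hne), dd.getLast hne) ∧
    PvInv n
      (if dd.getLast hne - (dd.dropLast.countP (fun d => decide (d < dd.getLast hne)) : Int) ≤ pos
       then pos + 1 else pos)
      dd.dropLast
      (A.1.set (dd.getLast hne).toNat "O",
       pvRelink A.2.1 n (predOf (alvL n dd) (dd.getLast hne))
         (succOf n (alvL n dd) (dd.getLast hne)) (dd.getLast hne) (dd.getLast hne),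
       A.2.2.1.dropLast, A.2.2.2) := by
  have hlen0 : 0 < dd.length := List.length_pos_iff.mpr hne
  have hrdd : dd.getLast hne ∈ dd := List.getLast_mem hne
  have hrb := hInv.mem _ hrdd
  have hn1 : 1 ≤ n := by omega
  have hddeq : dd.dropLast ++ [dd.getLast hne] = dd := List.dropLast_concat_getLast hne
  have hnodrop : dd.dropLast.Nodup := hInv.nodup.sublist (List.dropLast_sublist dd)
  have hmem' : ∀ d ∈ dd.dropLast, 0 ≤ d ∧ d < n :=
    fun d hd => hInv.mem d ((List.dropLast_sublist dd).mem hd)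
  have hrnd : dd.getLast hne ∉ dd.dropLast := by
    have hnd := hInv.nodup
    rw [← hddeq, List.nodup_append] at hnd
    intro hc
    exact hnd.2.2 _ hc _ (by simp) rfl
  have hgetD : dd.getD (dd.length - 1) 0 = dd.getLast hne := by
    rw [List.getD_eq_getElem _ _ (by omega), List.getLast_eq_getElem]
  -- the stack top is the delete-time record of the last deleted row
  have hstk := hInv.stk (dd.length - 1) (by omega)
  rw [show dd.length - 1 + 1 = dd.length from by omega, List.take_length, hgetD] at hstk
  have htop : A.2.2.1.getLast? = some (predOf (alvL n dd) (dd.getLast hne),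
      succOf n (alvL n dd) (dd.getLast hne), dd.getLast hne) := by
    have hlA : A.2.2.1.length = dd.length := hInv.stkLen
    rw [List.getLast?_eq_getElem?, List.getElem?_eq_getElem (by omega)]
    rw [← List.getD_eq_getElem _ (0, 0, 0) (by omega)]
    rw [show A.2.2.1.length - 1 = dd.length - 1 from by omega]
    rw [hstk]
  refine ⟨htop, ?_⟩
  -- the restored row inside the bigger live list
  have hrS'' : dd.getLast hne ∈ alvL n dd.dropLast := mem_alvL.mpr ⟨⟨hrb.1, hrb.2⟩, hrnd⟩
  have hS'' := sorted_alvL n dd.dropLast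
  have hS := sorted_alvL n dd
  obtain ⟨hrk0, hq2, hq2v⟩ := rank_idx hnodrop hmem' hrS''
  have hSeq : alvL n dd =
      (alvL n dd.dropLast).take
          (dd.getLast hne -
            (dd.dropLast.countP (fun d => decide (d < dd.getLast hne)) : Int)).toNat ++
        (alvL n dd.dropLast).drop
          ((dd.getLast hne -
            (dd.dropLast.countP (fun d => decide (d < dd.getLast hne)) : Int)).toNat + 1) := by
    conv_lhs => rw [← hddeq]
    rw [alvL_append, filter_ne_eq_small hS'' hq2 hq2v]
  have hlenN := length_alvL hInv.nodup hInv.mem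
  have hlenN' := length_alvL hnodrop hmem'
  have hlsm : (alvL n dd).length + 1 = (alvL n dd.dropLast).length := by
    rw [hSeq]
    exact length_small hq2
  have hldrop : (dd.dropLast.length : Int) = (dd.length : Int) - 1 := by
    rw [List.length_dropLast]
    omega
  constructor
  · exact hnodrop
  · exact hmem'
  · show A.1.set (dd.getLast hne).toNat "O" = _
    conv_lhs => rw [hInv.ans]
    rw [show (fun i : Int => if i ∈ dd then "X" else "O") =
          (fun i : Int => if i ∈ dd.dropLast ++ [dd.getLast hne] then "X" else "O") from by
      rw [hddeq]]
    exact ans_mark_O hrb.1 hrb.2 hrnd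
  · -- the cursor: live, sentinel -1, or sentinel n
    have hq2i : ((dd.getLast hne -
        (dd.dropLast.countP (fun d => decide (d < dd.getLast hne)) : Int)).toNat : Int) =
        dd.getLast hne - (dd.dropLast.countP (fun d => decide (d < dd.getLast hne)) : Int) := by
      omega
    rcases hInv.cur with ⟨hdd, _⟩ | ⟨h0, h1, hk⟩ | ⟨hp, hk⟩ | ⟨hp, hk⟩
    · exact absurd hdd hne
    · refine Or.inr (Or.inl ?_)
      by_cases hcnd : dd.getLast hne -
          (dd.dropLast.countP (fun d => decide (d < dd.getLast hne)) : Int) ≤ pos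
      · rw [if_pos hcnd]
        refine ⟨by omega, by omega, ?_⟩
        rw [hk, List.getD_eq_getElem _ _ (by omega), List.getD_eq_getElem _ _ (by omega)]
        rw [List.getElem_of_eq hSeq, getElem_small hq2, dif_neg (by omega)]
        congr 1 <;> omega
      · rw [if_neg hcnd]
        refine ⟨by omega, by omega, ?_⟩
        rw [hk, List.getD_eq_getElem _ _ (by omega), List.getD_eq_getElem _ _ (by omega)]
        rw [List.getElem_of_eq hSeq, getElem_small hq2, dif_pos (by omega)]
    · -- cursor parked on -1: the restored rank is ≥ 0, so B leaves pos, A leaves k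
      rw [if_neg (by omega)]
      exact Or.inr (Or.inr (Or.inl ⟨hp, hk⟩))
    · -- cursor parked on n: the restored rank is ≤ pos, so pos + 1 is the new sentinel rank
      rw [if_pos (by omega)]
      exact Or.inr (Or.inr (Or.inr ⟨by omega, hk⟩))
  · -- the live table
    have htblDead := hInv.tblDead (dd.length - 1) (by omega)
    rw [show dd.length - 1 + 1 = dd.length from by omega, List.take_length, hgetD] at htblDead
    have htr : A.2.1.getD ((alvL n dd.dropLast)[(dd.getLast hne -
        (dd.dropLast.countP (fun d => decide (d < dd.getLast hne)) : Int)).toNat]) (0, 0) =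
        (predOf (alvL n dd.dropLast) ((alvL n dd.dropLast)[(dd.getLast hne -
          (dd.dropLast.countP (fun d => decide (d < dd.getLast hne)) : Int)).toNat]),
         succOf n (alvL n dd.dropLast) ((alvL n dd.dropLast)[(dd.getLast hne -
          (dd.dropLast.countP (fun d => decide (d < dd.getLast hne)) : Int)).toNat])) := by
      rw [hq2v, htblDead, hSeq]
      rw [predOf_small_self hS'' hq2 hq2v, succOf_small_self hS'' hq2 hq2v]
    have hres := tbl_insert hS''
      (fun j hj => (mem_alvL.mp hj).1) hq2
      (fun j hj => by rw [← hSeq] at hj; exact (hSeq ▸ hInv.tbl j hj)) htr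
    intro j hj
    have := hres j hj
    rw [hq2v] at this
    show (pvRelink A.2.1 n _ _ _ _).getD j (0, 0) = _
    rw [show predOf (alvL n dd) (dd.getLast hne) =
          predOf (alvL n dd.dropLast) (dd.getLast hne) from by
        rw [hSeq, predOf_small_self hS'' hq2 hq2v],
      show succOf n (alvL n dd) (dd.getLast hne) =
          succOf n (alvL n dd.dropLast) (dd.getLast hne) from by
        rw [hSeq, succOf_small_self hS'' hq2 hq2v]]
    exact this
  · show A.2.2.1.dropLast.length = _
    rw [List.length_dropLast, List.length_dropLast, hInv.stkLen]
  · intro i hi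
    rw [List.length_dropLast] at hi
    show A.2.2.1.dropLast.getD i (0, 0, 0) = _
    rw [getD_dropLast _ _ _ (by rw [hInv.stkLen]; omega)]
    rw [getD_dropLast _ _ _ (by omega), take_dropLast_eq _ _ (by omega)]
    exact hInv.stk i (by omega)
  · intro i hi
    rw [List.length_dropLast] at hi
    rw [getD_dropLast _ _ _ (by omega), take_dropLast_eq _ _ (by omega)]
    have hθdd : dd.dropLast.getD i 0 ∈ dd.dropLast := by
      rw [List.getD_eq_getElem _ _ (by rw [List.length_dropLast]; omega)]
      exact List.getElem_mem _
    rw [getD_dropLast _ _ _ (by omega)] at hθdd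
    have hθd : dd.getD i 0 ∈ dd := (List.dropLast_sublist dd).mem hθdd
    have hθb := hInv.mem _ hθd
    have hθnS : dd.getD i 0 ∉ alvL n dd := fun hc => (mem_alvL.mp hc).2 hθd
    show (pvRelink A.2.1 n _ _ _ _).getD _ (0, 0) = _
    rw [pvRelink_getD_other (by
        rcases predOf_mem (alvL n dd) (dd.getLast hne) with h | ⟨h, _⟩
        · rw [h]; omega
        · intro hc
          rw [hc] at hθnS
          exact hθnS h)
      (by
        rcases succOf_mem n (alvL n dd) (dd.getLast hne) with h | ⟨h, _⟩
        · rw [h]; omega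
        · intro hc
          rw [hc] at hθnS
          exact hθnS h)]
    exact hInv.tblDead i (by omega)

-- ---------- one simulated step, and the whole run ----------

lemma pv_step {n : Int} {c : String} {pos : Int} {dd : List Int} {st' : Int × List Int}
    {A : List String × PySem.Dict Int (Int × Int) × List (Int × Int × Int) × Int}
    (hok : pvOk n c (pos, dd) = some st') (hInv : PvInv n pos dd A) :
    pvStepB n (pos, dd) c = st' ∧ PvInv n st'.1 st'.2 (pvStepA n A c) := by
  unfold pvOk at hok
  cases hget : PySem.Str.pyGet? c 0 with
  | none => rw [hget] at hok; exact absurd hok (by simp)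
  | some c0 =>
    rw [hget] at hok
    simp only at hok
    unfold pvStepB pvStepA
    rw [hget]
    simp only [Option.getD_some]
    by_cases hD : c0 = 'D'
    · rw [if_pos hD] at hok
      rw [if_pos hD, if_pos hD]
      cases hx : PySem.Int.ofStr? (PySem.Str.slice c (some 2) none) with
      | none => rw [hx] at hok; exact absurd hok (by simp)
      | some x =>
        rw [hx] at hok
        simp only [Option.getD_some] at hok ⊢
        split_ifs at hok with hx0 hbd
        · -- non-positive count: both sides are a no-op
          obtain rfl : (pos, dd) = st' := Option.some_injective _ hok
          refine ⟨by rw [if_neg (by omega)], ?_⟩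
          show PvInv n pos dd _
          rw [show x.toNat = 0 from by omega]
          simp only [Function.iterate_zero, id]
          exact hInv
        · obtain rfl : (pos + x, dd) = st' := Option.some_injective _ hok
          refine ⟨by rw [if_pos (by omega)], ?_⟩
          show PvInv n (pos + x) dd _
          exact pvInvD hInv (by omega) (by omega) (by omega)
    · rw [if_neg hD] at hok
      rw [if_neg hD, if_neg hD]
      by_cases hU : c0 = 'U'
      · rw [if_pos hU] at hok
        rw [if_pos hU, if_pos hU]
        cases hx : PySem.Int.ofStr? (PySem.Str.slice c (some 2) none) with
        | none => rw [hx] at hok; exact absurd hok (by simp)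
        | some x =>
          rw [hx] at hok
          simp only [Option.getD_some] at hok ⊢
          split_ifs at hok with hx0 hbd
          · obtain rfl : (pos, dd) = st' := Option.some_injective _ hok
            refine ⟨by rw [if_neg (by omega)], ?_⟩
            show PvInv n pos dd _
            rw [show x.toNat = 0 from by omega]
            simp only [Function.iterate_zero, id]
            exact hInv
          · obtain rfl : (pos - x, dd) = st' := Option.some_injective _ hok
            refine ⟨by rw [if_pos (by omega)], ?_⟩
            show PvInv n (pos - x) dd _
            exact pvInvU hInv (by omega) (by omega) (by omega) (by omega)
      · rw [if_neg hU] at hok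
        rw [if_neg hU, if_neg hU]
        by_cases hC : c0 = 'C'
        · rw [if_pos hC] at hok
          rw [if_pos hC, if_pos hC]
          by_cases hbd : 0 ≤ pos ∧ pos < n - (dd.length : Int) ∧ 2 ≤ n - (dd.length : Int)
          · rw [if_pos hbd] at hok
            obtain rfl := Option.some_injective _ hok
            obtain ⟨h0, h1, h2⟩ := hbd
            refine ⟨rfl, ?_⟩
            show PvInv n (if pos = n - (((dd ++ [pvSelect dd pos]).length : Nat) : Int)
                then pos - 1 else pos) (dd ++ [pvSelect dd pos])
              (A.1.set A.2.2.2.toNat "X",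
               pvRelink A.2.1 n (A.2.1.getD A.2.2.2 (0, 0)).1 (A.2.1.getD A.2.2.2 (0, 0)).2
                 (A.2.1.getD A.2.2.2 (0, 0)).1 (A.2.1.getD A.2.2.2 (0, 0)).2,
               A.2.2.1 ++ [((A.2.1.getD A.2.2.2 (0, 0)).1, (A.2.1.getD A.2.2.2 (0, 0)).2, A.2.2.2)],
               if (A.2.1.getD A.2.2.2 (0, 0)).2 = n then (A.2.1.getD A.2.2.2 (0, 0)).1
               else (A.2.1.getD A.2.2.2 (0, 0)).2)
            exact pvInvC hInv h0 h1 h2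
          · rw [if_neg hbd] at hok
            exact absurd hok (by simp)
        · rw [if_neg hC] at hok
          rw [if_neg hC, if_neg hC]
          by_cases hZ : c0 = 'Z'
          · rw [if_pos hZ] at hok
            rw [if_pos hZ, if_pos hZ]
            cases hgl : dd.getLast? with
            | none => rw [hgl] at hok; exact absurd hok (by simp)
            | some r =>
              rw [hgl] at hok
              simp only at hok
              obtain rfl := Option.some_injective _ hok
              have hne : dd ≠ [] := by
                intro hc
                rw [hc] at hgl
                exact absurd hgl (by simp)
              have hrl : r = dd.getLast hne := by
                have := List.getLast?_eq_some_getLast hne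
                rw [hgl] at this
                exact Option.some_injective _ this
              obtain ⟨htop, hinv'⟩ := pvInvZ hInv hne
              subst hrl
              rw [htop]
              exact ⟨rfl, hinv'⟩
          · rw [if_neg hZ] at hok
            rw [if_neg hZ, if_neg hZ]
            obtain rfl : (pos, dd) = st' := Option.some_injective _ hok
            exact ⟨rfl, hInv⟩

lemma pvOk_fold_none {n : Int} : ∀ (cmds : List String),
    cmds.foldl (fun st c => st.bind (pvOk n c)) none = none := by
  intro cmds
  induction cmds with
  | nil => rfl
  | cons c cmds ih => simpa using ih

lemma pv_fold {n : Int} : ∀ (cmds : List String) (st0 st' : Int × List Int)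
    (A : List String × PySem.Dict Int (Int × Int) × List (Int × Int × Int) × Int),
    cmds.foldl (fun st c => st.bind (pvOk n c)) (some st0) = some st' →
    PvInv n st0.1 st0.2 A →
    cmds.foldl (pvStepB n) st0 = st' ∧ PvInv n st'.1 st'.2 (cmds.foldl (pvStepA n) A) := by
  intro cmds
  induction cmds with
  | nil =>
    intro st0 st' A h hInv
    simp only [List.foldl_nil] at h ⊢
    obtain rfl := Option.some_injective _ h
    exact ⟨rfl, hInv⟩
  | cons c cmds ih =>
    intro st0 st' A h hInv
    simp only [List.foldl_cons, Option.bind_some] at h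
    cases hok : pvOk n c (st0.1, st0.2) with
    | none =>
      rw [show pvOk n c st0 = pvOk n c (st0.1, st0.2) from rfl, hok] at h
      rw [pvOk_fold_none] at h
      exact absurd h (by simp)
    | some st1 =>
      obtain ⟨hB, hI⟩ := pv_step hok hInv
      rw [show pvOk n c st0 = pvOk n c (st0.1, st0.2) from rfl, hok] at h
      simp only [List.foldl_cons]
      rw [show pvStepB n st0 c = pvStepB n (st0.1, st0.2) c from rfl, hB]
      exact ih st1 st' _ h hI

-- ===== VERDICT (by name: the statement is the Claim_ definition above) =====
theorem solution_spec : Claim_equal_solution := by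
  intro n k cmd _hdom hpre
  unfold Spec_solution solution solution_alt
  unfold Pre_solution at hpre
  rw [Option.isSome_iff_exists] at hpre
  obtain ⟨st', hst⟩ := hpre
  obtain ⟨hB, hI⟩ := pv_fold cmd (k, []) st'
    (PySem.List.pyRepeat ["O"] n,
     (PySem.List.pyRange 0 n 1).foldl (fun t i => t.insert i (i - 1, i + 1)) PySem.Dict.empty,
     [], k) hst (pvInv_init n k)
  simp only
  rw [hB, hI.ans, resB_eq st'.2 hI.mem]
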